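-- pv_equiv track=rewrite | github.com/tan-eddie/google-code-jam-2019 | round_1a/alien_rhyme/alien_rhyme.py | alien_rhyme
-- ===== SOURCE A (Python) =====
-- def alien_rhyme(words):
--   # Store indices of words with the given rhyming suffix as key.
--   rhyming_suffix = {}
--   for i in range(len(words)):
--     word = words[i]
--     for j in range(len(word)):
--       suffix = word[j:len(word)]
--       if suffix in rhyming_suffix:
--         rhyming_suffix[suffix].append(i)
--       else:
--         rhyming_suffix[suffix] = [i]
--
--   # Now remove all key value pairs that only have one index in the value
--   # (nothing will rhyme with them).
--   rhyming_suffix = {suffix: rhyming_suffix[suffix] for suffix in rhyming_suffix if len(rhyming_suffix[suffix]) > 1}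
--
--   pairs_formed = []
--   for suffix in sorted(rhyming_suffix, key=len, reverse=True):
--     # Remove any already formed pairs from this suffix.
--     for pair in pairs_formed:
--       for p in pair:
--         if p in rhyming_suffix[suffix]:
--           rhyming_suffix[suffix].remove(p)
--
--     # Take one pair from each suffix (just take the first 2 for convenience)
--     if len(rhyming_suffix[suffix]) >= 2:
--       rhyming_suffix[suffix] = rhyming_suffix[suffix][0:2]
--       pairs_formed.append(rhyming_suffix[suffix])
--     else:
--       # But if not enough, then we need to remove all possible pair candidates from this suffix.
--       rhyming_suffix[suffix] = []
--
--   # Now work out how many elements remain.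
--   count = 0
--   for suffix in rhyming_suffix:
--     count += len(rhyming_suffix[suffix])
--   return count
-- ===== SOURCE B (Python) =====
-- def alien_rhyme(words):
--   # Trie-style divide and conquer over reversed words: bucket tails by first
--   # character, recurse into each bucket, and pair two unpaired words at each
--   # non-root node (each node = one distinct rhyming suffix), bottom-up.
--   def solve(tails, is_root):
--     paired = 0
--     unpaired = tails.count('')
--     buckets = {}
--     for t in tails:
--       if t:
--         buckets.setdefault(t[0], []).append(t[1:])
--     for b in buckets.values():
--       p, u = solve(b, False)
--       paired += p
--       unpaired += u
--     if not is_root and unpaired >= 2: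
--       paired += 2
--       unpaired -= 2
--     return paired, unpaired
--   return solve([w[::-1] for w in words], True)[0]
-- ===== Notes on version B (the rewrite author's own statement) =====
-- stated objective: faster
-- what changed: B drops A's suffix dictionary, its sort of all suffixes by length, and its greedy pass with pair-removal scans entirely: it recurses on a character-bucketed trie of the reversed words (divide and conquer on the first character of the reversed tails), pairing two unpaired words at each non-root node bottom-up and returning the pair count directly.
import Mathlib
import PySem

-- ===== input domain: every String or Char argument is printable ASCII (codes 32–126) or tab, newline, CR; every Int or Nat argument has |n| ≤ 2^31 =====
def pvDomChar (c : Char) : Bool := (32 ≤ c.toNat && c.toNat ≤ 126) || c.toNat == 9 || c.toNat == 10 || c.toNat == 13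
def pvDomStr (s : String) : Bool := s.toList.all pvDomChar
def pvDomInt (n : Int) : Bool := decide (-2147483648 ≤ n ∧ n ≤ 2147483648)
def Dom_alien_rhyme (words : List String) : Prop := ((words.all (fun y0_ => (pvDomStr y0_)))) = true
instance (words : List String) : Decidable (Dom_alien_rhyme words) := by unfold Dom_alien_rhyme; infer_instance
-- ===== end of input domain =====

-- B replaces A's suffix dictionary + longest-first greedy pass by a trie-style
-- divide and conquer on the reversed words, pairing bottom-up at each node.

-- ===== PORT A =====
-- dict lookups rhyming_suffix[suffix] are ported as getD _ []: the key is always present.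
def alien_rhyme (words : List String) : Int :=
  let d0 : PySem.Dict String (List Int) :=
    (PySem.List.pyRange 0 (words.length : Int) 1).foldl (fun d i =>
      let word := PySem.List.pyGetD words i ""
      (PySem.List.pyRange 0 (PySem.Str.len word) 1).foldl (fun d j =>
        let suffix := PySem.Str.slice word (some j) (some (PySem.Str.len word))
        if d.contains suffix then
          d.insert suffix (d.getD suffix [] ++ [i])
        else
          d.insert suffix [i]) d) PySem.Dict.empty
  let d1 : PySem.Dict String (List Int) :=
    d0.keys.foldl (fun d s =>
      if (d0.getD s []).length > 1 then d.insert s (d0.getD s []) else d) PySem.Dict.empty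
  let loop :=
    (PySem.List.sorted d1.keys PySem.Str.len true).foldl
      (fun (st : PySem.Dict String (List Int) × List (List Int)) suffix =>
        let d' := st.2.foldl (fun d pair =>
            pair.foldl (fun d p =>
              if p ∈ d.getD suffix [] then
                d.insert suffix ((PySem.List.remove? (d.getD suffix []) p).getD (d.getD suffix []))
              else d) d) st.1
        if 2 ≤ (d'.getD suffix []).length then
          let pr := PySem.List.slice (d'.getD suffix []) (some 0) (some 2)
          (d'.insert suffix pr, st.2 ++ [pr])
        else (d'.insert suffix ([] : List Int), st.2)) (d1, ([] : List (List Int)))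
  loop.1.items.foldl (fun c p => c + (p.2.length : Int)) 0

-- ===== PORT B =====
-- helpers of B: the bucketing loop ('if t: buckets.setdefault(t[0], []).append(t[1:])'),
-- with t[0] / t[1:] read off t's character list (exact: t is tested nonempty first),
-- plus the size lemmas solveB's termination cites.
def pvDecomp (t : String) : Option (Char × String) :=
  match t.toList with
  | [] => none
  | c :: cs => some (c, String.ofList cs)

def pvBuckets (tails : List String) : PySem.Dict Char (List String) :=
  tails.foldl (fun d t =>
    match pvDecomp t with
    | none => d
    | some (c, s) => d.modify c [] (· ++ [s])) PySem.Dict.empty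

def pvTotLen (tails : List String) : Nat := (tails.map (fun t => t.toList.length)).sum

lemma pvBuckets_eq_fold (tails : List String) :
    pvBuckets tails = (tails.filterMap pvDecomp).foldl
      (fun d p => d.modify p.1 [] (· ++ [p.2])) PySem.Dict.empty := by
  suffices h : ∀ (l : List String) (d : PySem.Dict Char (List String)),
      l.foldl (fun d t => match pvDecomp t with
        | none => d
        | some (c, s) => d.modify c [] (· ++ [s])) d
      = (l.filterMap pvDecomp).foldl (fun d p => d.modify p.1 [] (· ++ [p.2])) d by
    exact h tails PySem.Dict.empty
  intro l
  induction l with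
  | nil => intro d; rfl
  | cons t l ih =>
    intro d
    rw [List.foldl_cons, List.filterMap_cons]
    cases h : pvDecomp t with
    | none => simp only [h]; exact ih d
    | some p => cases p with
      | mk c s => simp only [h, List.foldl_cons]; exact ih _

lemma getD_pvBuckets (tails : List String) (c : Char) :
    (pvBuckets tails).getD c []
      = ((tails.filterMap pvDecomp).filter (fun p => p.1 == c)).map (·.2) := by
  rw [pvBuckets_eq_fold, PySem.Dict.getD_foldl_modify_append]
  simp

lemma keys_pvBuckets_nodup (tails : List String) : (pvBuckets tails).keys.Nodup := by
  rw [pvBuckets_eq_fold]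
  exact PySem.Dict.nodup_keys_foldl_modify_key (tails.filterMap pvDecomp)
    (fun p : Char × String => p.1) [] (fun _ p v => v ++ [p.2]) PySem.Dict.empty
    (by simp [PySem.Dict.keys, PySem.Dict.empty])

lemma mem_keys_pvBuckets (tails : List String) (c : Char) :
    c ∈ (pvBuckets tails).keys ↔ c ∈ (tails.filterMap pvDecomp).map (·.1) := by
  rw [pvBuckets_eq_fold]
  have hk := PySem.Dict.keys_foldl_modify_key (tails.filterMap pvDecomp)
    (fun p : Char × String => p.1) [] (fun _ p v => v ++ [p.2]) PySem.Dict.empty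
  rw [show (List.foldl (fun d p => d.modify p.1 [] fun x => x ++ [p.2]) PySem.Dict.empty
      (List.filterMap pvDecomp tails)).keys
    = PySem.Set.update PySem.Dict.empty.keys (List.map (fun p => p.1) (List.filterMap pvDecomp tails))
    from hk]
  rw [PySem.Set.mem_update]
  simp [PySem.Dict.keys, PySem.Dict.empty]

lemma bucket_totLen (tails : List String) (c : Char) :
    pvTotLen ((pvBuckets tails).getD c [])
      + ((pvBuckets tails).getD c []).length ≤ pvTotLen tails := by
  rw [getD_pvBuckets]
  induction tails with
  | nil => simp [pvTotLen]
  | cons t l ih =>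
    rw [List.filterMap_cons]
    cases h : pvDecomp t with
    | none =>
      simp only [pvTotLen, List.map_cons, List.sum_cons] at *
      omega
    | some p =>
      obtain ⟨c', s⟩ := p
      have hts : t.toList.length = s.toList.length + 1 := by
        unfold pvDecomp at h
        cases ht : t.toList with
        | nil => rw [ht] at h; simp at h
        | cons x xs =>
          rw [ht] at h; simp at h
          simp [← h.2, ht]
      by_cases hc : c' = c
      · subst hc
        simp only [List.filter_cons, beq_self_eq_true, if_pos, List.map_cons]
        simp only [pvTotLen, List.map_cons, List.sum_cons, List.length_cons] at *
        omega
      · simp only [List.filter_cons, beq_iff_eq, hc, if_neg, if_false]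
        simp only [pvTotLen, List.map_cons, List.sum_cons] at *
        omega

lemma getD_ne_nil_of_mem_keys (tails : List String) (c : Char)
    (h : c ∈ (pvBuckets tails).keys) : (pvBuckets tails).getD c [] ≠ [] := by
  rw [mem_keys_pvBuckets] at h
  rw [getD_pvBuckets]
  obtain ⟨p, hp, hpc⟩ := List.mem_map.mp h
  have : p ∈ (tails.filterMap pvDecomp).filter (fun p => p.1 == c) :=
    List.mem_filter.mpr ⟨hp, by simp [hpc]⟩
  intro hnil
  rw [List.map_eq_nil_iff] at hnil
  rw [hnil] at this
  exact absurd this (List.not_mem_nil)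

lemma pvBuckets_values_totLen (tails : List String) :
    ∀ b ∈ (pvBuckets tails).values, pvTotLen b < pvTotLen tails := by
  intro b hb
  have hval := PySem.Dict.values_eq_map_keys (pvBuckets tails) (keys_pvBuckets_nodup tails) []
  rw [hval] at hb
  obtain ⟨c, hc, rfl⟩ := List.mem_map.mp hb
  have h1 := bucket_totLen tails c
  have h2 := getD_ne_nil_of_mem_keys tails c hc
  have : 1 ≤ ((pvBuckets tails).getD c []).length := by
    cases h : (pvBuckets tails).getD c [] with
    | nil => exact absurd h h2
    | cons x xs => simp
  omega

-- the recursive node solver: count words ending here, bucket the rest by first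
-- character, recurse, then pair two unpaired words at this node if non-root.
def solveB (tails : List String) (isRoot : Bool) : Int × Int :=
  let unpaired0 : Int := (PySem.List.count tails "" : Int)
  let pu := (pvBuckets tails).values.attach.foldl
    (fun (pu : Int × Int) b =>
      let r := solveB b.1 false
      (pu.1 + r.1, pu.2 + r.2)) ((0 : Int), unpaired0)
  if isRoot = false ∧ 2 ≤ pu.2 then (pu.1 + 2, pu.2 - 2) else pu
termination_by pvTotLen tails
decreasing_by exact pvBuckets_values_totLen tails b.1 b.2

def alien_rhyme_alt (words : List String) : Int :=
  (solveB (words.map (fun w => (PySem.Str.slice? w none none (-1)).getD "")) true).1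

-- ===== PRECONDITION & SPEC =====
def Spec_alien_rhyme (words : List String) (out : Int) : Prop := out = alien_rhyme_alt words
instance (words : List String) (out : Int) : Decidable (Spec_alien_rhyme words out) := by unfold Spec_alien_rhyme; infer_instance

-- ===== CLAIM (what is proved, stated in full; the proofs are below) =====
def Claim_equal_alien_rhyme : Prop := ∀ (words : List String), Dom_alien_rhyme words → Spec_alien_rhyme words (alien_rhyme words)

-- ===== LEMMAS AND PROOFS =====

-- ---------- A-side machinery: A's fold characterised as a greedy used-set fold ----------

-- Stage names for A's let-chain (definitionally equal to the port).
def buildA (words : List String) : PySem.Dict String (List Int) :=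
  (PySem.List.pyRange 0 (words.length : Int) 1).foldl (fun d i =>
    let word := PySem.List.pyGetD words i ""
    (PySem.List.pyRange 0 (PySem.Str.len word) 1).foldl (fun d j =>
      let suffix := PySem.Str.slice word (some j) (some (PySem.Str.len word))
      if d.contains suffix then
        d.insert suffix (d.getD suffix [] ++ [i])
      else
        d.insert suffix [i]) d) PySem.Dict.empty

def buildB (words : List String) : PySem.Dict String (List Int) :=
  (PySem.List.enumerate words).foldl (fun g iw =>
    (PySem.List.pyRange 0 (PySem.Str.len iw.2) 1).foldl (fun g j =>
      g.modify (PySem.Str.slice iw.2 (some j) none) [] (· ++ [iw.1])) g) PySem.Dict.empty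

def selA (words : List String) : PySem.Dict String (List Int) :=
  (buildA words).keys.foldl (fun d s =>
    if ((buildA words).getD s []).length > 1 then d.insert s ((buildA words).getD s []) else d)
    PySem.Dict.empty

def kfilt (g : PySem.Dict String (List Int)) : List String :=
  g.keys.filter (fun s => (g.getD s []).length > 1)

def sumLen (d : PySem.Dict String (List Int)) : Int :=
  d.items.foldl (fun c p => c + (p.2.length : Int)) 0

def remStep (suffix : String) (d : PySem.Dict String (List Int)) (p : Int) :
    PySem.Dict String (List Int) :=
  if p ∈ d.getD suffix [] then
    d.insert suffix ((PySem.List.remove? (d.getD suffix []) p).getD (d.getD suffix []))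
  else d

def stepA (st : PySem.Dict String (List Int) × List (List Int)) (suffix : String) :
    PySem.Dict String (List Int) × List (List Int) :=
  let d' := st.2.foldl (fun d pair => pair.foldl (remStep suffix) d) st.1
  if 2 ≤ (d'.getD suffix []).length then
    let pr := PySem.List.slice (d'.getD suffix []) (some 0) (some 2)
    (d'.insert suffix pr, st.2 ++ [pr])
  else (d'.insert suffix ([] : List Int), st.2)

def stepB (g : PySem.Dict String (List Int)) (st : PySem.Set Int × Int) (s : String) :
    PySem.Set Int × Int :=
  let avail := PySem.List.slice ((g.getD s []).filter (fun i => !st.1.contains i)) none (some 2)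
  if avail.length == 2 then (PySem.Set.update st.1 avail, st.2 + 2) else st

lemma A_unfold (words : List String) :
    alien_rhyme words =
      sumLen ((PySem.List.sorted (selA words).keys PySem.Str.len true).foldl stepA
        (selA words, ([] : List (List Int)))).1 := rfl

-- the nonempty suffixes of a word, in A's generation order
def sfx (w : String) : List String :=
  (PySem.List.pyRange 0 (PySem.Str.len w) 1).map (fun j => PySem.Str.slice w (some j) none)

def innerB (i : Int) (w : String) (g : PySem.Dict String (List Int)) :
    PySem.Dict String (List Int) :=
  (PySem.List.pyRange 0 (PySem.Str.len w) 1).foldl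
    (fun g j => g.modify (PySem.Str.slice w (some j) none) [] (· ++ [i])) g

lemma buildB_eq_fold (words : List String) :
    buildB words = (PySem.List.enumerate words).foldl (fun g iw => innerB iw.1 iw.2 g)
      PySem.Dict.empty := rfl

lemma toList_sfx_mem (w : String) (j : Int) (hj : 0 ≤ j) :
    (PySem.Str.slice w (some j) none).toList = w.toList.drop j.toNat := by
  simp only [PySem.Str.slice, String.toList_ofList, PySem.Chars.slice]
  exact PySem.List.slice_from _ hj

lemma sfx_nodup (w : String) : (sfx w).Nodup := by
  refine List.Nodup.map_on ?_ (PySem.List.nodup_pyRange_one 0 (PySem.Str.len w))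
  intro x hx y hy hxy
  rw [PySem.List.mem_pyRange_one] at hx hy
  have hlen := congrArg (fun s => s.toList.length) hxy
  simp only [toList_sfx_mem w x hx.1, toList_sfx_mem w y hy.1, List.length_drop] at hlen
  have hw := PySem.Str.len_eq w
  omega

lemma filter_beq_nodup (l : List String) (h : l.Nodup) (s : String) :
    l.filter (· == s) = if l.contains s then [s] else [] := by
  induction l with
  | nil => simp
  | cons x l ih =>
    rcases List.nodup_cons.mp h with ⟨hx, hl⟩
    by_cases hxs : x = s
    · subst hxs
      have : l.filter (· == x) = [] := List.filter_eq_nil_iff.mpr (fun a ha hba => by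
        simp only [beq_iff_eq] at hba; exact hx (hba ▸ ha))
      simp [this]
    · simp only [List.filter_cons, beq_iff_eq, hxs, if_false, List.contains_cons, ih hl]
      simp only [List.contains_iff_mem]
      have : ¬ s = x := fun h2 => hxs h2.symm
      by_cases hm : s ∈ l <;> simp [hm, this]

lemma getD_innerB (i : Int) (w : String) (g : PySem.Dict String (List Int)) (s : String) :
    (innerB i w g).getD s [] =
      g.getD s [] ++ (if (sfx w).contains s then [i] else []) := by
  have hfold : innerB i w g =
      ((sfx w).map (fun t => (t, i))).foldl (fun d p => d.modify p.1 [] (· ++ [p.2])) g := by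
    unfold innerB sfx
    rw [List.map_map, List.foldl_map]
    rfl
  rw [hfold, PySem.Dict.getD_foldl_modify_append]
  congr 1
  rw [List.filter_map]
  have : ((sfx w).filter ((fun p => p.1 == s) ∘ fun t => (t, i))) = (sfx w).filter (· == s) :=
    List.filter_congr (fun a _ => rfl)
  rw [this, filter_beq_nodup _ (sfx_nodup w) s]
  simp only [List.contains_iff_mem]
  by_cases hc : s ∈ sfx w <;> simp [hc]

lemma getD_fold_innerB (l : List (Int × String)) (g : PySem.Dict String (List Int)) (s : String) :
    (l.foldl (fun g iw => innerB iw.1 iw.2 g) g).getD s [] =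
      g.getD s [] ++ (l.filter (fun iw => (sfx iw.2).contains s)).map (·.1) := by
  induction l generalizing g with
  | nil => simp
  | cons iw l ih =>
    rw [List.foldl_cons, ih, getD_innerB]
    simp only [List.contains_iff_mem]
    by_cases hm : s ∈ sfx iw.2 <;> simp [hm, List.append_assoc]

lemma enum_eq_range (xs : List String) (s : Int) :
    PySem.List.enumerate xs s =
      (List.range xs.length).map (fun (t : Nat) => (s + (t : Int), xs.getD t "")) := by
  induction xs generalizing s with
  | nil => simp [PySem.List.enumerate_nil]
  | cons x xs ih =>
    rw [PySem.List.enumerate_cons, ih (s + 1), List.length_cons, List.range_succ_eq_map,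
      List.map_cons, List.map_map]
    refine congrArg₂ _ (by simp) (List.map_congr_left (fun t _ => ?_))
    simp only [Function.comp_apply, Nat.succ_eq_add_one, List.getD_cons_succ]
    congr 1
    push_cast
    ring

lemma slice_len_none (w : String) (j : Int) (hj : 0 ≤ j) :
    PySem.Str.slice w (some j) (some (PySem.Str.len w)) = PySem.Str.slice w (some j) none := by
  simp only [PySem.Str.slice, PySem.Chars.slice]
  congr 1
  rw [PySem.List.slice_toNat _ hj (by rw [PySem.Str.len_eq]; positivity),
    PySem.List.slice_from _ hj]
  apply List.take_of_length_le
  rw [List.length_drop]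
  have : (PySem.Str.len w).toNat = w.toList.length := by rw [PySem.Str.len_eq]; simp
  omega

lemma build_eq (words : List String) : buildA words = buildB words := by
  unfold buildA
  rw [buildB_eq_fold, enum_eq_range words 0, List.foldl_map, PySem.List.pyRange_one,
    List.foldl_map]
  simp only [Int.sub_zero, Int.toNat_natCast, zero_add]
  refine PySem.List.foldl_congr_mem _ _ _ _ (fun d t _ => ?_)
  simp only [PySem.List.pyGetD_natCast]
  refine PySem.List.foldl_congr_mem _ _ _ _ (fun g j hj => ?_)
  have hj0 : 0 ≤ j := (PySem.List.mem_pyRange_one.mp hj).1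
  rw [slice_len_none (words.getD t "") j hj0]
  simp only [PySem.Dict.modify, List.getD_eq_getElem?_getD]
  by_cases hc : g.contains (PySem.Str.slice (words[t]?.getD "") (some j))
  · simp [hc]
  · simp [hc, PySem.Dict.getD_of_not_contains _ _ (by simpa using hc)]

lemma getD_buildB (words : List String) (s : String) :
    (buildB words).getD s [] =
      ((PySem.List.enumerate words).filter (fun iw => (sfx iw.2).contains s)).map (·.1) := by
  rw [buildB_eq_fold, getD_fold_innerB]
  simp

lemma nodup_getD_buildB (words : List String) (s : String) :
    ((buildB words).getD s []).Nodup := by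
  rw [getD_buildB]
  refine List.Nodup.sublist (List.Sublist.map _ List.filter_sublist) ?_
  rw [PySem.List.map_fst_enumerate]
  exact PySem.List.nodup_pyRange_one _ _

lemma nodup_keys_buildB (words : List String) : (buildB words).keys.Nodup := by
  rw [buildB_eq_fold]
  suffices h : ∀ (l : List (Int × String)) (g : PySem.Dict String (List Int)), g.keys.Nodup →
      (l.foldl (fun g iw => innerB iw.1 iw.2 g) g).keys.Nodup by
    exact h _ _ (by simp [PySem.Dict.keys, PySem.Dict.empty])
  intro l
  induction l with
  | nil => intro g hg; simpa
  | cons iw l ih =>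
    intro g hg
    rw [List.foldl_cons]
    refine ih _ ?_
    have := PySem.Dict.nodup_keys_foldl_modify_key
      (PySem.List.pyRange 0 (PySem.Str.len iw.2) 1)
      (fun j => PySem.Str.slice iw.2 (some j) none) ([] : List Int)
      (fun _ _ => (· ++ [iw.1])) g hg
    exact this

lemma foldl_if_filter (c : String → Prop) [DecidablePred c] (v : String → List Int)
    (l : List String) (d : PySem.Dict String (List Int)) :
    l.foldl (fun d s => if c s then d.insert s (v s) else d) d
      = (l.filter (fun s => decide (c s))).foldl (fun d s => d.insert s (v s)) d := by
  induction l generalizing d with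
  | nil => rfl
  | cons x l ih =>
    rw [List.foldl_cons, List.filter_cons]
    by_cases hx : c x <;>
      simp only [hx, decide_true, decide_false, if_pos, if_neg, not_false_iff,
        List.foldl_cons, Bool.false_eq_true] <;> rw [ih]

lemma selA_items (words : List String) :
    (selA words).items = (kfilt (buildA words)).map (fun s => (s, (buildA words).getD s [])) := by
  unfold selA
  rw [foldl_if_filter (fun s => ((buildA words).getD s []).length > 1)
    (fun s => (buildA words).getD s []) _ _]
  have hk : (kfilt (buildA words)).Nodup := by
    unfold kfilt; rw [build_eq]; exact (nodup_keys_buildB words).filter _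
  have hit := PySem.Dict.items_foldl_insert_fresh (kfilt (buildA words)) (fun s => s)
    (fun s => (buildA words).getD s []) PySem.Dict.empty
    (fun a _ => PySem.Dict.contains_empty a) (by simpa using hk)
  simpa [kfilt] using hit

lemma keys_selA (words : List String) : (selA words).keys = kfilt (buildA words) := by
  simp [PySem.Dict.keys, selA_items, List.map_map, Function.comp_def]

lemma nodup_keys_selA (words : List String) : (selA words).keys.Nodup := by
  rw [keys_selA]
  unfold kfilt
  rw [build_eq]
  exact (nodup_keys_buildB words).filter _

lemma getD_selA (words : List String) (s : String) (hs : s ∈ kfilt (buildA words)) :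
    (selA words).getD s [] = (buildA words).getD s [] := by
  refine PySem.Dict.getD_of_mem_items _ ?_ (nodup_keys_selA words) []
  rw [selA_items]
  exact List.mem_map.mpr ⟨s, hs, rfl⟩

-- removal by one element on a duplicate-free list is a filter
lemma remove_filter (l : List Int) (p : Int) (h : l.Nodup) :
    (if p ∈ l then ((PySem.List.remove? l p).getD l) else l) = l.filter (fun x => !(x == p)) := by
  by_cases hp : p ∈ l
  · rw [if_pos hp, PySem.List.remove?_eq_some_erase l p hp, Option.getD_some,
      List.Nodup.erase_eq_filter h p]
    exact List.filter_congr (fun a _ => by simp [bne])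
  · rw [if_neg hp]
    refine (List.filter_eq_self.mpr ?_).symm
    intro a ha
    simp only [Bool.not_eq_eq_eq_not, Bool.not_true, beq_eq_false_iff_ne]
    rintro rfl; exact hp ha

-- sequential removal of a list of elements is a single filter
lemma remList_filter (ps : List Int) (l : List Int) (h : l.Nodup) :
    ps.foldl (fun l p => if p ∈ l then ((PySem.List.remove? l p).getD l) else l) l
      = l.filter (fun x => !ps.contains x) := by
  induction ps generalizing l with
  | nil => simp
  | cons p ps ih =>
    rw [List.foldl_cons, remove_filter l p h,
      ih (l.filter (fun x => !(x == p))) (h.filter _), List.filter_filter]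
    refine List.filter_congr (fun a _ => ?_)
    simp only [List.contains_cons, Bool.not_or, Bool.and_comm]

-- an insert whose value is the current value is the identity (present key, unique keys)
lemma insert_getD_self (d : PySem.Dict String (List Int)) (s : String)
    (hk : d.keys.Nodup) (hs : s ∈ d.keys) : d.insert s (d.getD s []) = d := by
  apply PySem.Dict.ext
  rw [PySem.Dict.items_insert_of_contains d _ ((PySem.Dict.contains_iff_mem_keys d s).mpr hs)]
  conv_rhs => rw [← List.map_id d.items]
  refine List.map_congr_left (fun p hp => ?_)
  by_cases hk2 : p.1 = s
  · have hv : d.getD p.1 [] = p.2 := PySem.Dict.getD_of_mem_items d hp hk []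
    simp only [id_eq, hk2, beq_self_eq_true, if_pos]
    rw [← hk2, hv]
  · simp [hk2]

-- A's removal double-loop rewrites only the current key
lemma remLoop_eq (pf : List (List Int)) (d : PySem.Dict String (List Int)) (s : String)
    (hk : d.keys.Nodup) (hs : s ∈ d.keys) :
    pf.foldl (fun d pair => pair.foldl (remStep s) d) d
      = d.insert s (pf.flatten.foldl
          (fun l p => if p ∈ l then ((PySem.List.remove? l p).getD l) else l) (d.getD s [])) := by
  rw [← List.foldl_flatten]
  generalize pf.flatten = ps
  induction ps generalizing d with
  | nil => simpa using (insert_getD_self d s hk hs).symm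
  | cons p ps ih =>
    have hc : d.contains s = true := (PySem.Dict.contains_iff_mem_keys d s).mpr hs
    rw [List.foldl_cons, List.foldl_cons]
    by_cases hp : p ∈ d.getD s []
    · rw [show remStep s d p = d.insert s ((PySem.List.remove? (d.getD s []) p).getD (d.getD s []))
        from by simp [remStep, hp]]
      rw [ih (d.insert s _)
        (by rw [PySem.Dict.keys_insert_of_contains d _ hc]; exact hk)
        (by rw [PySem.Dict.keys_insert_of_contains d _ hc]; exact hs)]
      rw [PySem.Dict.getD_insert_self, PySem.Dict.insert_insert_self, if_pos hp]
    · rw [show remStep s d p = d from by simp [remStep, hp]]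
      rw [ih d hk hs, if_neg hp]

-- sum of value lengths over a map with one distinguished position
lemma sum_map_update (l : List String) (f g : String → Int) (s : String)
    (hnd : l.Nodup) (hs : s ∈ l) (hfg : ∀ t ∈ l, t ≠ s → f t = g t) :
    (l.map f).sum = (l.map g).sum - g s + f s := by
  induction l with
  | nil => cases hs
  | cons t l ih =>
    rcases List.nodup_cons.mp hnd with ⟨hts, hndl⟩
    by_cases ht : t = s
    · subst ht
      have : l.map f = l.map g :=
        List.map_congr_left (fun a ha => hfg a (List.mem_cons_of_mem _ ha)
          (fun h => hts (h ▸ ha)))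
      simp only [List.map_cons, List.sum_cons, this]
      ring
    · have hs' : s ∈ l := by
        rcases List.mem_cons.mp hs with h | h
        · exact absurd h.symm ht
        · exact h
      have hft : f t = g t := hfg t List.mem_cons_self ht
      have := ih hndl hs' (fun a ha hne => hfg a (List.mem_cons_of_mem _ ha) hne)
      simp only [List.map_cons, List.sum_cons, this, hft]
      ring

lemma sumLen_eq_sum (d : PySem.Dict String (List Int)) (hk : d.keys.Nodup) :
    sumLen d = (d.keys.map (fun k => ((d.getD k []).length : Int))).sum := by
  unfold sumLen
  rw [PySem.List.foldl_add d.items (fun p => ((p.2.length : Int))) 0]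
  rw [PySem.Dict.items_eq_map_keys d hk []]
  simp [List.map_map, Function.comp_def]

lemma sumLen_insert (d : PySem.Dict String (List Int)) (s : String) (v : List Int)
    (hk : d.keys.Nodup) (hs : s ∈ d.keys) :
    sumLen (d.insert s v) = sumLen d - ((d.getD s []).length : Int) + (v.length : Int) := by
  have hc : d.contains s = true := (PySem.Dict.contains_iff_mem_keys d s).mpr hs
  have hkeys : (d.insert s v).keys = d.keys := PySem.Dict.keys_insert_of_contains d _ hc
  rw [sumLen_eq_sum _ (by rw [hkeys]; exact hk), sumLen_eq_sum d hk, hkeys]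
  have := sum_map_update d.keys (fun k => (((d.insert s v).getD k []).length : Int))
    (fun k => ((d.getD k []).length : Int)) s hk hs
    (fun t _ hne => by simp only []; rw [PySem.Dict.getD_insert, if_neg hne])
  rw [this]
  simp only []
  rw [PySem.Dict.getD_insert_self]

lemma mem_update_iff (u : PySem.Set Int) (l : List Int) (x : Int) :
    x ∈ PySem.Set.update u l ↔ x ∈ u ∨ x ∈ l := by
  induction l generalizing u with
  | nil => simp [PySem.Set.update]
  | cons y l ih =>
    simp only [PySem.Set.update, List.foldl_cons] at ih ⊢
    rw [ih]
    simp only [PySem.Set.mem_add, List.mem_cons]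
    tauto

-- the main loop invariant connecting A's fold with the greedy used-set fold
lemma loop_eq (words : List String) (todo : List String)
    (d : PySem.Dict String (List Int)) (pf : List (List Int))
    (used : PySem.Set Int) (cnt : Int)
    (h1 : ∀ s ∈ todo, d.getD s [] = (buildB words).getD s [])
    (h2 : ∀ x : Int, x ∈ used ↔ x ∈ pf.flatten)
    (h3 : d.keys = kfilt (buildB words))
    (htodo : todo.Nodup)
    (hsub : ∀ s ∈ todo, s ∈ kfilt (buildB words)) :
    sumLen (todo.foldl stepA (d, pf)).1 + cnt
      = sumLen d + (todo.foldl (stepB (buildB words)) (used, cnt)).2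
          - (todo.map (fun s => ((d.getD s []).length : Int))).sum := by
  induction todo generalizing d pf used cnt with
  | nil => simp
  | cons s todo ih =>
    have hkK : (kfilt (buildB words)).Nodup := (nodup_keys_buildB words).filter _
    have hdk : d.keys.Nodup := h3 ▸ hkK
    have hsK : s ∈ kfilt (buildB words) := hsub s List.mem_cons_self
    have hsd : s ∈ d.keys := h3 ▸ hsK
    have hcd : d.contains s = true := (PySem.Dict.contains_iff_mem_keys d s).mpr hsd
    have hg : d.getD s [] = (buildB words).getD s [] := h1 s List.mem_cons_self
    have hnodupv : (d.getD s []).Nodup := hg ▸ nodup_getD_buildB words s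
    have hsnotodo : s ∉ todo := (List.nodup_cons.mp htodo).1
    have htodo' : todo.Nodup := (List.nodup_cons.mp htodo).2
    have hsub' : ∀ t ∈ todo, t ∈ kfilt (buildB words) :=
      fun t ht => hsub t (List.mem_cons_of_mem _ ht)
    set val := (d.getD s []).filter (fun x => !pf.flatten.contains x) with hval
    have hrem : pf.foldl (fun d pair => pair.foldl (remStep s) d) d = d.insert s val := by
      rw [remLoop_eq pf d s hdk hsd, remList_filter _ _ hnodupv]
    have havail :
        PySem.List.slice (((buildB words).getD s []).filter (fun i => !used.contains i))
          none (some 2) = val.take 2 := by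
      rw [PySem.List.slice_to _ (by norm_num)]
      norm_num
      congr 1
      rw [← hg]
      refine List.filter_congr (fun x _ => ?_)
      have hx := h2 x
      by_cases hm : x ∈ used
      · simp [hm, hx.mp hm]
      · have : x ∉ pf.flatten := fun hf => hm (hx.mpr hf)
        simp [hm, this]
    have hpr : PySem.List.slice val (some 0) (some 2) = val.take 2 := by
      rw [PySem.List.slice_toNat val (by norm_num) (by norm_num)]
      simp
    have hsum_congr : ∀ (v : List Int),
        (todo.map (fun t => (((d.insert s v).getD t []).length : Int))).sum
          = (todo.map (fun t => ((d.getD t []).length : Int))).sum := by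
      intro v
      refine congrArg _ (List.map_congr_left (fun t ht => ?_))
      rw [PySem.Dict.getD_insert, if_neg (fun h : _ = s => hsnotodo (h ▸ ht))]
    rw [List.foldl_cons, List.foldl_cons]
    by_cases hc2 : 2 ≤ val.length
    · have hstepA : stepA (d, pf) s = (d.insert s (val.take 2), pf ++ [val.take 2]) := by
        unfold stepA
        simp only [hrem, PySem.Dict.getD_insert_self]
        rw [if_pos hc2, hpr, PySem.Dict.insert_insert_self]
      have hstepB : stepB (buildB words) (used, cnt) s = (PySem.Set.update used (val.take 2), cnt + 2) := by
        unfold stepB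
        simp only [havail]
        rw [if_pos (by simp [List.length_take]; omega)]
      rw [hstepA, hstepB]
      have hih := ih (d.insert s (val.take 2)) (pf ++ [val.take 2])
        (PySem.Set.update used (val.take 2)) (cnt + 2)
        (fun t ht => by
          rw [PySem.Dict.getD_insert, if_neg (fun h : _ = s => hsnotodo (h ▸ ht))]
          exact h1 t (List.mem_cons_of_mem _ ht))
        (fun x => by
          rw [mem_update_iff, h2, List.flatten_append]
          simp)
        (by rw [PySem.Dict.keys_insert_of_contains d _ hcd]; exact h3)
        htodo' hsub'
      have hsl : sumLen (d.insert s (val.take 2))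
          = sumLen d - ((d.getD s []).length : Int) + ((val.take 2).length : Int) :=
        sumLen_insert d s _ hdk hsd
      have hlen2 : ((val.take 2).length : Int) = 2 := by simp [List.length_take]; omega
      rw [hsum_congr] at hih
      simp only [List.map_cons, List.sum_cons]
      omega
    · have hstepA : stepA (d, pf) s = (d.insert s ([] : List Int), pf) := by
        unfold stepA
        simp only [hrem, PySem.Dict.getD_insert_self]
        rw [if_neg hc2, PySem.Dict.insert_insert_self]
      have hstepB : stepB (buildB words) (used, cnt) s = (used, cnt) := by
        unfold stepB
        simp only [havail]
        rw [if_neg (by simp [List.length_take]; omega)]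
      rw [hstepA, hstepB]
      have hih := ih (d.insert s ([] : List Int)) pf used cnt
        (fun t ht => by
          rw [PySem.Dict.getD_insert, if_neg (fun h : _ = s => hsnotodo (h ▸ ht))]
          exact h1 t (List.mem_cons_of_mem _ ht))
        h2
        (by rw [PySem.Dict.keys_insert_of_contains d _ hcd]; exact h3)
        htodo' hsub'
      have hsl : sumLen (d.insert s ([] : List Int))
          = sumLen d - ((d.getD s []).length : Int) + (([] : List Int).length : Int) :=
        sumLen_insert d s _ hdk hsd
      rw [hsum_congr] at hih
      simp only [List.map_cons, List.sum_cons, List.length_nil, Int.natCast_zero] at hih hsl ⊢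
      omega

-- A's program equals the greedy used-set fold over the sorted shared suffixes
lemma A_eq_greedy (words : List String) :
    alien_rhyme words =
      ((PySem.List.sorted (kfilt (buildB words)) PySem.Str.len true).foldl
        (stepB (buildB words)) ((PySem.Set.empty : PySem.Set Int), (0 : Int))).2 := by
  rw [A_unfold]
  have hkf : kfilt (buildA words) = kfilt (buildB words) := by rw [build_eq]
  have hkey : (selA words).keys = kfilt (buildB words) := by rw [keys_selA, hkf]
  rw [hkey]
  have hperm : (PySem.List.sorted (kfilt (buildB words)) PySem.Str.len true).Perm
      (kfilt (buildB words)) := PySem.List.sorted_perm _ _ _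
  have hkK : (kfilt (buildB words)).Nodup := (nodup_keys_buildB words).filter _
  have hgetD : ∀ s ∈ kfilt (buildB words), (selA words).getD s [] = (buildB words).getD s [] := by
    intro s hs
    rw [getD_selA words s (hkf ▸ hs), build_eq]
  have h := loop_eq words (PySem.List.sorted (kfilt (buildB words)) PySem.Str.len true)
    (selA words) [] PySem.Set.empty 0
    (fun s hs => hgetD s ((PySem.List.mem_sorted _ _ _ _).mp hs))
    (fun x => by simp [PySem.Set.empty])
    hkey
    (hperm.nodup_iff.mpr hkK)
    (fun s hs => (PySem.List.mem_sorted _ _ _ _).mp hs)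
  have hsum : ((PySem.List.sorted (kfilt (buildB words)) PySem.Str.len true).map
      (fun s => (((selA words).getD s []).length : Int))).sum = sumLen (selA words) := by
    rw [sumLen_eq_sum _ (nodup_keys_selA words), hkey]
    exact List.Perm.sum_eq (List.Perm.map _ hperm)
  omega

-- ---------- the abstract per-suffix pairing predicate (middle layer) ----------

-- reversed words
def RW (words : List String) : List (List Char) := words.map (fun w => w.toList.reverse)

-- number of words having the suffix whose reversal is r
def cntR (words : List String) (r : List Char) : Nat :=
  (RW words).countP (fun l => decide (r <+: l))

def prefs (l : List Char) : List (List Char) := (List.range l.length).map (fun k => l.take (k+1))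

-- the distinct nonempty reversed suffixes of the words
def allR (words : List String) : List (List Char) := PySem.List.dedup ((RW words).flatMap prefs)

def maxW (words : List String) : Nat := ((RW words).map List.length).foldl max 0

lemma mem_prefs (l t : List Char) : t ∈ prefs l ↔ t ≠ [] ∧ t <+: l := by
  unfold prefs
  simp only [List.mem_map, List.mem_range]
  constructor
  · rintro ⟨k, hk, rfl⟩
    refine ⟨?_, List.take_prefix _ _⟩
    have : (l.take (k+1)).length = k + 1 := by
      rw [List.length_take]; omega
    intro hnil
    rw [hnil] at this
    simp at this
  · rintro ⟨hne, hpre⟩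
    have hlen : t.length ≤ l.length := hpre.length_le
    have hpos : 1 ≤ t.length := by
      cases t with
      | nil => exact absurd rfl hne
      | cons x xs => simp
    refine ⟨t.length - 1, by omega, ?_⟩
    have : t.length - 1 + 1 = t.length := by omega
    rw [this, ← List.prefix_iff_eq_take.mp hpre]

lemma mem_allR (words : List String) (t : List Char) :
    t ∈ allR words ↔ t ≠ [] ∧ ∃ l ∈ RW words, t <+: l := by
  unfold allR
  rw [PySem.List.mem_dedup]
  simp only [List.mem_flatMap]
  constructor
  · rintro ⟨l, hl, ht⟩
    obtain ⟨hne, hpre⟩ := (mem_prefs l t).mp ht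
    exact ⟨hne, l, hl, hpre⟩
  · rintro ⟨hne, l, hl, hpre⟩
    exact ⟨l, hl, (mem_prefs l t).mpr ⟨hne, hpre⟩⟩

lemma nodup_allR (words : List String) : (allR words).Nodup := PySem.List.nodup_dedup _

lemma length_le_maxW (words : List String) (l : List Char) (hl : l ∈ RW words) :
    l.length ≤ maxW words :=
  (PySem.List.le_foldl_max ((RW words).map List.length) 0).2 l.length
    (List.mem_map.mpr ⟨l, hl, rfl⟩)

lemma mem_allR_length (words : List String) (t : List Char) (ht : t ∈ allR words) :
    t.length ≤ maxW words := by
  obtain ⟨-, l, hl, hpre⟩ := (mem_allR words t).mp ht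
  exact le_trans hpre.length_le (length_le_maxW words l hl)

lemma strict_prefix_length {r t : List Char} (hpre : r <+: t) (hne : t ≠ r) :
    r.length < t.length := by
  rcases lt_or_eq_of_le hpre.length_le with h | h
  · exact h
  · exact absurd (hpre.eq_of_length h).symm hne

-- paired r: at the trie node of the reversed suffix r a pair is formed, i.e.
-- at least two words with this suffix remain unpaired after all strictly longer
-- suffixes (prefix-extensions of r) have taken their pairs.
def pairedR (words : List String) (r : List Char) : Bool :=
  decide (2 ≤ (cntR words r : Int) -
    2 * ((((allR words).filter (fun t => decide (r <+: t) && decide (t ≠ r))).attach.countP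
      (fun t => pairedR words t.1) : Nat) : Int))
termination_by maxW words + 1 - r.length
decreasing_by
  have hmem := t.2
  rw [List.mem_filter] at hmem
  obtain ⟨hA, hcond⟩ := hmem
  simp only [Bool.and_eq_true, decide_eq_true_eq] at hcond
  have h1 : r.length < t.1.length := strict_prefix_length hcond.1 hcond.2
  have h2 : t.1.length ≤ maxW words := mem_allR_length words t.1 hA
  omega

-- number of paired strict extensions / extensions of r
def DS (words : List String) (r : List Char) : Nat :=
  ((allR words).filter (fun t => decide (r <+: t) && decide (t ≠ r))).countP (pairedR words)

def NS (words : List String) (r : List Char) : Nat :=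
  ((allR words).filter (fun t => decide (r <+: t))).countP (pairedR words)

lemma pairedR_def (words : List String) (r : List Char) :
    pairedR words r = decide (2 ≤ (cntR words r : Int) - 2 * (DS words r : Int)) := by
  rw [pairedR]
  have h : List.countP (fun t => pairedR words t.1)
      ((allR words).filter (fun t => decide (r <+: t) && decide (t ≠ r))).attach
      = DS words r := by
    unfold DS
    exact List.countP_attach
  rw [h]

lemma pairedR_cntR (words : List String) (r : List Char) (h : pairedR words r = true) :
    2 ≤ cntR words r := by
  rw [pairedR_def] at h
  rw [decide_eq_true_eq] at h
  omega

lemma NS_eq_DS (words : List String) (r : List Char) (hr : r ≠ []) :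
    NS words r = DS words r + (if r ∈ allR words ∧ pairedR words r = true then 1 else 0) := by
  unfold NS DS
  by_cases hmem : r ∈ allR words
  · have hsplit : List.Perm ((allR words).filter (fun t => decide (r <+: t)))
        (r :: (allR words).filter (fun t => decide (r <+: t) && decide (t ≠ r))) := by
      have h1 : List.Perm ((allR words).filter (fun t => decide (r <+: t)))
          (((allR words).filter (fun t => decide (r <+: t))).filter (fun t => decide (t = r))
            ++ ((allR words).filter (fun t => decide (r <+: t))).filter (fun t => !decide (t = r))) :=
        (List.filter_append_perm _ _).symm
      have h2 : ((allR words).filter (fun t => decide (r <+: t))).filter (fun t => decide (t = r))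
          = [r] := by
        have hnd : ((allR words).filter (fun t => decide (r <+: t))).Nodup :=
          (nodup_allR words).filter _
        have : ∀ (L : List (List Char)), L.Nodup → r ∈ L →
            L.filter (fun t => decide (t = r)) = [r] := by
          intro L
          induction L with
          | nil => intro _ h; cases h
          | cons x L ih =>
            intro hnd hm
            rcases List.nodup_cons.mp hnd with ⟨hx, hL⟩
            rcases List.mem_cons.mp hm with rfl | hm'
            · rw [List.filter_cons_of_pos (by simp)]
              rw [List.filter_eq_nil_iff.mpr (fun a ha hd => by
                rw [decide_eq_true_eq] at hd; exact hx (hd ▸ ha))]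
            · rw [List.filter_cons_of_neg (by
                simp only [decide_eq_true_eq]
                rintro rfl; exact hx hm')]
              exact ih hL hm'
        exact this _ hnd (List.mem_filter.mpr ⟨hmem, by simp⟩)
      have h3 : ((allR words).filter (fun t => decide (r <+: t))).filter (fun t => !decide (t = r))
          = (allR words).filter (fun t => decide (r <+: t) && decide (t ≠ r)) := by
        rw [List.filter_filter]
        exact List.filter_congr (fun a _ => by
          by_cases h : a = r <;> by_cases h' : r <+: a <;> simp [h, h'])
      rw [h2, h3] at h1
      simpa using h1
    rw [List.Perm.countP_eq _ hsplit, List.countP_cons]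
    by_cases hp : pairedR words r = true
    · simp [hmem, hp]
    · simp only [Bool.not_eq_true] at hp
      simp [hmem, hp]
  · have h3 : (allR words).filter (fun t => decide (r <+: t))
        = (allR words).filter (fun t => decide (r <+: t) && decide (t ≠ r)) := by
      exact List.filter_congr (fun a ha => by
        by_cases h : r <+: a
        · have : a ≠ r := by rintro rfl; exact hmem ha
          simp [h, this]
        · simp [h])
    simp [h3, hmem]

lemma cntR_pos_mem_allR (words : List String) (r : List Char) (hr : r ≠ [])
    (h : 1 ≤ cntR words r) : r ∈ allR words := by
  unfold cntR at h
  obtain ⟨l, hl, hpre⟩ := List.countP_pos_iff.mp (show 0 < (RW words).countP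
    (fun l => decide (r <+: l)) by omega)
  rw [decide_eq_true_eq] at hpre
  exact (mem_allR words r).mpr ⟨hr, l, hl, hpre⟩

-- ---------- linking A's suffix dictionary with the middle layer ----------

lemma mem_sfx (w s : String) : s ∈ sfx w ↔ s.toList ≠ [] ∧ s.toList <:+ w.toList := by
  unfold sfx
  simp only [List.mem_map]
  constructor
  · rintro ⟨j, hj, rfl⟩
    rw [PySem.List.mem_pyRange_one] at hj
    rw [toList_sfx_mem w j hj.1]
    have hw := PySem.Str.len_eq w
    constructor
    · intro hnil
      have hlen := congrArg List.length hnil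
      rw [List.length_drop] at hlen
      simp only [List.length_nil] at hlen
      have hj2 := hj.2
      rw [hw] at hj2
      omega
    · exact List.drop_suffix _ _
  · rintro ⟨hne, hsuf⟩
    have hlen : s.toList.length ≤ w.toList.length := hsuf.length_le
    have hpos : 1 ≤ s.toList.length := by
      cases h : s.toList with
      | nil => exact absurd h hne
      | cons x xs => simp [h]
    refine ⟨((w.toList.length - s.toList.length : Nat) : Int), ?_, ?_⟩
    · rw [PySem.List.mem_pyRange_one]
      have hw := PySem.Str.len_eq w
      constructor
      · positivity
      · rw [hw]; omega
    · apply String.toList_inj.mp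
      rw [toList_sfx_mem w _ (by positivity)]
      rw [Int.toNat_natCast]
      obtain ⟨u, hu⟩ := hsuf
      rw [← hu]
      have h9 : (u ++ s.toList).length - s.toList.length = u.length := by simp
      rw [h9, List.drop_left]

lemma mem_keys_buildB (words : List String) (s : String) :
    s ∈ (buildB words).keys ↔ ∃ w ∈ words, s ∈ sfx w := by
  rw [buildB_eq_fold]
  have hkeys : ∀ (l : List (Int × String)) (g : PySem.Dict String (List Int)),
      ∀ t, t ∈ (l.foldl (fun g iw => innerB iw.1 iw.2 g) g).keys
        ↔ t ∈ g.keys ∨ ∃ iw ∈ l, t ∈ sfx iw.2 := by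
    intro l
    induction l with
    | nil => intro g t; simp
    | cons iw l ih =>
      intro g t
      rw [List.foldl_cons, ih]
      have hinner : (innerB iw.1 iw.2 g).keys = PySem.Set.update g.keys (sfx iw.2) := by
        unfold innerB
        have hk := PySem.Dict.keys_foldl_modify_key
          (PySem.List.pyRange 0 (PySem.Str.len iw.2) 1)
          (fun j => PySem.Str.slice iw.2 (some j) none) ([] : List Int)
          (fun _ _ => (· ++ [iw.1])) g
        rw [hk]
        unfold sfx
        rfl
      rw [hinner, PySem.Set.mem_update]
      simp only [List.mem_cons]
      constructor
      · rintro (⟨h | h⟩ | ⟨jw, hjw, hs⟩)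
        · exact Or.inl h
        · exact Or.inr ⟨iw, Or.inl rfl, h⟩
        · exact Or.inr ⟨jw, Or.inr hjw, hs⟩
      · rintro (h | ⟨jw, (rfl | hjw), hs⟩)
        · exact Or.inl (Or.inl h)
        · exact Or.inl (Or.inr hs)
        · exact Or.inr ⟨jw, hjw, hs⟩
  rw [hkeys]
  simp only [PySem.Dict.keys, PySem.Dict.empty]
  constructor
  · rintro (h | ⟨iw, hiw, hs⟩)
    · simp at h
    · obtain ⟨k, hk, rfl⟩ := (PySem.List.mem_enumerate_iff _ _ _).mp hiw
      exact ⟨words[k], List.getElem_mem hk, by simpa using hs⟩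
  · rintro ⟨w, hw, hs⟩
    obtain ⟨k, hk, rfl⟩ := List.mem_iff_getElem.mp hw
    exact Or.inr ⟨(0 + (k : Int), words[k]), (PySem.List.mem_enumerate_iff _ _ _).mpr ⟨k, hk, rfl⟩, hs⟩

lemma keys_nonempty (words : List String) (s : String) (hs : s ∈ (buildB words).keys) :
    s.toList ≠ [] := by
  obtain ⟨w, -, hsf⟩ := (mem_keys_buildB words s).mp hs
  exact ((mem_sfx w s).mp hsf).1

lemma grp_len (words : List String) (s : String) (hne : s.toList ≠ []) :
    ((buildB words).getD s []).length = cntR words s.toList.reverse := by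
  rw [getD_buildB, List.length_map, ← List.countP_eq_length_filter]
  unfold cntR RW
  rw [List.countP_map]
  have he : ∀ (l : List String) (st : Int),
      (PySem.List.enumerate l st).countP (fun iw => (sfx iw.2).contains s)
        = l.countP (fun w => (sfx w).contains s) := by
    intro l
    induction l with
    | nil => intro st; simp [PySem.List.enumerate_nil]
    | cons x l ih =>
      intro st
      rw [PySem.List.enumerate_cons, List.countP_cons, List.countP_cons, ih]
  rw [he]
  refine List.countP_congr (fun w _ => ?_)
  simp only [List.contains_iff_mem, Function.comp_apply, decide_eq_true_eq]
  rw [mem_sfx]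
  constructor
  · rintro ⟨-, hsuf⟩
    exact List.reverse_prefix.mpr hsuf
  · intro hpre
    exact ⟨hne, List.reverse_prefix.mp hpre⟩

lemma mem_kfilt (words : List String) (s : String) :
    s ∈ kfilt (buildB words)
      ↔ s ∈ (buildB words).keys ∧ 2 ≤ cntR words s.toList.reverse := by
  unfold kfilt
  rw [List.mem_filter]
  constructor
  · rintro ⟨hk, hlen⟩
    rw [decide_eq_true_eq] at hlen
    rw [grp_len words s (keys_nonempty words s hk)] at hlen
    exact ⟨hk, by omega⟩
  · rintro ⟨hk, hc⟩
    refine ⟨hk, ?_⟩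
    rw [decide_eq_true_eq, grp_len words s (keys_nonempty words s hk)]
    omega

lemma mem_keys_iff_allR (words : List String) (s : String) :
    s ∈ (buildB words).keys ↔ s.toList.reverse ∈ allR words := by
  rw [mem_keys_buildB, mem_allR]
  unfold RW
  constructor
  · rintro ⟨w, hw, hsf⟩
    obtain ⟨hne, hsuf⟩ := (mem_sfx w s).mp hsf
    exact ⟨by simpa using hne, w.toList.reverse, List.mem_map.mpr ⟨w, hw, rfl⟩,
      List.reverse_prefix.mpr hsuf⟩
  · rintro ⟨hne, l, hl, hpre⟩
    obtain ⟨w, hw, rfl⟩ := List.mem_map.mp hl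
    exact ⟨w, hw, (mem_sfx w s).mpr ⟨by simpa using hne, List.reverse_prefix.mp hpre⟩⟩

-- the string form of a reversed suffix
lemma sigma_props (t : List Char) :
    (String.ofList t.reverse).toList.reverse = t := by
  rw [String.toList_ofList, List.reverse_reverse]

lemma paired_mem_kfilt (words : List String) (t : List Char)
    (ht : t ∈ allR words) (hp : pairedR words t = true) :
    String.ofList t.reverse ∈ kfilt (buildB words) := by
  rw [mem_kfilt, mem_keys_iff_allR, sigma_props]
  exact ⟨ht, pairedR_cntR words t hp⟩

-- generic rev-bijection counting: a countP over strings equals a countP over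
-- reversed char lists when membership-with-property corresponds
lemma count_rev_eq (P : String → Bool) (Q : List Char → Bool)
    (S : List String) (T : List (List Char)) (hS : S.Nodup) (hT : T.Nodup)
    (hmem : ∀ t : List Char, (∃ s ∈ S, P s = true ∧ s.toList.reverse = t)
      ↔ (t ∈ T ∧ Q t = true)) :
    S.countP P = T.countP Q := by
  have hinj : ∀ a b : String, a.toList.reverse = b.toList.reverse → a = b := by
    intro a b h
    apply String.toList_inj.mp
    have := congrArg List.reverse h
    simpa using this
  have hperm : List.Perm ((S.filter P).map (fun s => s.toList.reverse)) (T.filter Q) := by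
    rw [List.perm_ext_iff_of_nodup]
    · intro t
      rw [List.mem_filter, List.mem_map]
      constructor
      · rintro ⟨s, hs, rfl⟩
        rw [List.mem_filter] at hs
        exact (hmem _).mp ⟨s, hs.1, hs.2, rfl⟩
      · rintro ht
        obtain ⟨s, hsS, hsP, hst⟩ := (hmem t).mpr ht
        exact ⟨s, List.mem_filter.mpr ⟨hsS, hsP⟩, hst⟩
    · refine List.Nodup.map_on ?_ (hS.filter _)
      intro a ha b hb hab
      exact hinj a b hab
    · exact hT.filter _
  have := hperm.length_eq
  rw [List.length_map, ← List.countP_eq_length_filter, ← List.countP_eq_length_filter] at this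
  exact this

-- ---------- the greedy fold equals 2 * (number of paired suffixes) ----------

def pairedS (words : List String) (s : String) : Bool := pairedR words s.toList.reverse

-- chosen pairs bookkeeping for the greedy fold
def GInv (words : List String) (done : List String) (ch : List (String × List Int))
    (used : PySem.Set Int) : Prop :=
  ch.map Prod.fst = done.filter (pairedS words)
  ∧ (∀ pr ∈ ch, pr.2.length = 2 ∧ pr.2.Nodup ∧ ∀ x ∈ pr.2, x ∈ (buildB words).getD pr.1 [])
  ∧ List.Pairwise (fun a b => ∀ x, x ∈ a.2 → x ∉ b.2) ch
  ∧ (∀ x : Int, x ∈ used ↔ ∃ pr ∈ ch, x ∈ pr.2)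

lemma mem_grp (words : List String) (i : Int) (s : String) :
    i ∈ (buildB words).getD s []
      ↔ ∃ k : Nat, k < words.length ∧ i = (k : Int) ∧ s ∈ sfx words[k]! := by
  rw [getD_buildB]
  simp only [List.mem_map, List.mem_filter]
  constructor
  · rintro ⟨iw, ⟨hiw, hsf⟩, rfl⟩
    obtain ⟨k, hk, rfl⟩ := (PySem.List.mem_enumerate_iff _ _ _).mp hiw
    refine ⟨k, hk, by simp, ?_⟩
    simp only [List.contains_iff_mem] at hsf
    simpa [List.getElem!_eq_getElem?_getD, List.getElem?_eq_getElem hk] using hsf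
  · rintro ⟨k, hk, rfl, hsf⟩
    refine ⟨(0 + (k : Int), words[k]), ⟨(PySem.List.mem_enumerate_iff _ _ _).mpr ⟨k, hk, rfl⟩, ?_⟩, by simp⟩
    simp only [List.contains_iff_mem]
    simpa [List.getElem!_eq_getElem?_getD, List.getElem?_eq_getElem hk] using hsf

lemma grp_common_word (words : List String) (i : Int) (s t : String)
    (hs : i ∈ (buildB words).getD s []) (ht : i ∈ (buildB words).getD t []) :
    ∃ w, s ∈ sfx w ∧ t ∈ sfx w := by
  obtain ⟨k, hk, hik, hks⟩ := (mem_grp words i s).mp hs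
  obtain ⟨k', hk', hik', hkt⟩ := (mem_grp words i t).mp ht
  have : k = k' := by omega
  subst this
  exact ⟨words[k]!, hks, hkt⟩

lemma sfx_comparable (w s t : String) (hs : s ∈ sfx w) (ht : t ∈ sfx w) :
    s.toList <:+ t.toList ∨ t.toList <:+ s.toList := by
  obtain ⟨-, hs2⟩ := (mem_sfx w s).mp hs
  obtain ⟨-, ht2⟩ := (mem_sfx w t).mp ht
  rcases List.prefix_or_prefix_of_prefix (List.reverse_prefix.mpr hs2)
    (List.reverse_prefix.mpr ht2) with h | h
  · exact Or.inl (List.reverse_prefix.mp h)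
  · exact Or.inr (List.reverse_prefix.mp h)

lemma grp_mono (words : List String) (i : Int) (s t : String)
    (hst : s.toList <:+ t.toList) (hne : s.toList ≠ [])
    (ht : i ∈ (buildB words).getD t []) : i ∈ (buildB words).getD s [] := by
  obtain ⟨k, hk, hik, hkt⟩ := (mem_grp words i t).mp ht
  obtain ⟨-, hsuf⟩ := (mem_sfx _ t).mp hkt
  exact (mem_grp words i s).mpr ⟨k, hk, hik, (mem_sfx _ s).mpr ⟨hne, hst.trans hsuf⟩⟩

lemma flat_nodup (ch : List (String × List Int))
    (h2 : ∀ pr ∈ ch, pr.2.Nodup)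
    (h3 : List.Pairwise (fun a b => ∀ x, x ∈ a.2 → x ∉ b.2) ch) :
    (ch.map (fun pr => pr.2)).flatten.Nodup := by
  induction ch with
  | nil => simp
  | cons pr ch ih =>
    rw [List.map_cons, List.flatten_cons]
    rcases List.pairwise_cons.mp h3 with ⟨hhd, htl⟩
    refine List.Nodup.append (h2 pr List.mem_cons_self)
      (ih (fun q hq => h2 q (List.mem_cons_of_mem _ hq)) htl) ?_
    intro x hx hx2
    rw [List.mem_flatten] at hx2
    obtain ⟨v, hv, hxv⟩ := hx2
    obtain ⟨q, hq, rfl⟩ := List.mem_map.mp hv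
    exact hhd q hq x hx hxv

lemma sum_len_two (l : List (List Int)) (h : ∀ v ∈ l, v.length = 2) :
    (l.map List.length).sum = 2 * l.length := by
  induction l with
  | nil => simp
  | cons v l ih =>
    rw [List.map_cons, List.sum_cons, h v List.mem_cons_self,
      ih (fun u hu => h u (List.mem_cons_of_mem _ hu)), List.length_cons]
    ring

lemma greedy_go (words : List String) :
    ∀ (rest done : List String) (ch : List (String × List Int))
      (used : PySem.Set Int) (cnt : Int),
      PySem.List.sorted (kfilt (buildB words)) PySem.Str.len true = done ++ rest →
      GInv words done ch used →
      (rest.foldl (stepB (buildB words)) (used, cnt)).2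
        = cnt + 2 * ((rest.countP (pairedS words) : Nat) : Int) := by
  intro rest
  induction rest with
  | nil => intro done ch used cnt hL hInv; simp
  | cons s rest' ih =>
    intro done ch used cnt hL hInv
    obtain ⟨inv1, inv2, inv3, inv4⟩ := hInv
    set L := PySem.List.sorted (kfilt (buildB words)) PySem.Str.len true with hLdef
    have hLperm : List.Perm L (kfilt (buildB words)) := PySem.List.sorted_perm _ _ _
    have hLnodup : L.Nodup := hLperm.nodup_iff.mpr ((nodup_keys_buildB words).filter _)
    have hLpair : L.Pairwise (fun a b => PySem.Str.len b ≤ PySem.Str.len a) :=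
      PySem.List.sorted_pairwise_rev _ _
    have hmemL : ∀ t, t ∈ L ↔ t ∈ kfilt (buildB words) :=
      fun t => PySem.List.mem_sorted _ _ _ _
    have hdonesub : ∀ t ∈ done, t ∈ L := fun t ht => hL ▸ List.mem_append_left _ ht
    have hsL : s ∈ L := hL ▸ List.mem_append_right _ List.mem_cons_self
    have hsK : s ∈ kfilt (buildB words) := (hmemL s).mp hsL
    have hskeys : s ∈ (buildB words).keys := ((mem_kfilt words s).mp hsK).1
    have hsne : s.toList ≠ [] := keys_nonempty words s hskeys
    have hnd2 : (done ++ s :: rest').Nodup := hL ▸ hLnodup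
    have hsdone : s ∉ done := by
      intro h
      rcases List.disjoint_of_nodup_append hnd2 h List.mem_cons_self
    have hdonenodup : done.Nodup := (List.nodup_append.mp hnd2).1
    have hlen_done : ∀ t ∈ done, PySem.Str.len s ≤ PySem.Str.len t := by
      intro t ht
      have := (List.pairwise_append.mp (hL ▸ hLpair)).2.2
      exact this t ht s List.mem_cons_self
    have hlonger_done : ∀ t ∈ L, s.toList.length < t.toList.length → t ∈ done := by
      intro t htL hlen
      rcases List.mem_append.mp (hL ▸ htL) with h | h
      · exact h
      · exfalso
        rcases List.mem_cons.mp h with rfl | h'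
        · omega
        · have hpair2 := (List.pairwise_append.mp (hL ▸ hLpair)).2.1
          have := (List.pairwise_cons.mp hpair2).1 t h'
          rw [PySem.Str.len_eq, PySem.Str.len_eq] at this
          omega
    have hchdone : ∀ pr ∈ ch, pr.1 ∈ done ∧ pairedS words pr.1 = true := by
      intro pr hpr
      have : pr.1 ∈ done.filter (pairedS words) := inv1 ▸ List.mem_map.mpr ⟨pr, hpr, rfl⟩
      exact ⟨(List.mem_filter.mp this).1, (List.mem_filter.mp this).2⟩
    -- the relevant chosen pairs: those at strict suffix-extensions of s
    set rel : String × List Int → Bool :=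
      fun pr => decide (s.toList <:+ pr.1.toList) && decide (pr.1 ≠ s) with hrel
    set cch := ch.filter rel with hcch
    set flat := (cch.map (fun pr => pr.2)).flatten with hflat
    have hmemflat : ∀ x : Int, x ∈ flat ↔ ∃ pr ∈ ch, rel pr = true ∧ x ∈ pr.2 := by
      intro x
      rw [hflat, List.mem_flatten]
      constructor
      · rintro ⟨v, hv, hxv⟩
        obtain ⟨pr, hpr, rfl⟩ := List.mem_map.mp hv
        rw [hcch, List.mem_filter] at hpr
        exact ⟨pr, hpr.1, hpr.2, hxv⟩
      · rintro ⟨pr, hpr, hr, hx⟩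
        exact ⟨pr.2, List.mem_map.mpr ⟨pr, List.mem_filter.mpr ⟨hpr, hr⟩, rfl⟩, hx⟩
    -- characterisation of used ∩ grp s
    have hused_grp : ∀ x : Int, x ∈ (buildB words).getD s [] → (x ∈ used ↔ x ∈ flat) := by
      intro x hxg
      rw [hmemflat, inv4]
      constructor
      · rintro ⟨pr, hpr, hxpr⟩
        refine ⟨pr, hpr, ?_, hxpr⟩
        obtain ⟨hprdone, -⟩ := hchdone pr hpr
        have hxgt : x ∈ (buildB words).getD pr.1 [] := (inv2 pr hpr).2.2 x hxpr
        obtain ⟨w, hws, hwt⟩ := grp_common_word words x s pr.1 hxg hxgt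
        have hne : pr.1 ≠ s := fun h => hsdone (h ▸ hprdone)
        have hlen : s.toList.length ≤ pr.1.toList.length := by
          have := hlen_done pr.1 hprdone
          rw [PySem.Str.len_eq, PySem.Str.len_eq] at this
          omega
        rcases sfx_comparable w s pr.1 hws hwt with h | h
        · simp [hrel, h, hne]
        · have hle := h.length_le
          have : pr.1.toList = s.toList := h.eq_of_length (by omega)
          exact absurd (String.toList_inj.mp this) hne
      · rintro ⟨pr, hpr, -, hxpr⟩
        exact ⟨pr, hpr, hxpr⟩
    have hflat_sub : ∀ x ∈ flat, x ∈ (buildB words).getD s [] := by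
      intro x hx
      obtain ⟨pr, hpr, hr, hxpr⟩ := (hmemflat x).mp hx
      rw [hrel] at hr
      simp only [Bool.and_eq_true, decide_eq_true_eq] at hr
      exact grp_mono words x s pr.1 hr.1 hsne ((inv2 pr hpr).2.2 x hxpr)
    have hflat_nodup : flat.Nodup :=
      flat_nodup cch (fun pr hpr => (inv2 pr (List.mem_filter.mp hpr).1).2.1)
        (inv3.sublist List.filter_sublist)
    have hgrp_nodup : ((buildB words).getD s []).Nodup := nodup_getD_buildB words s
    -- counting: |grp s ∩ used| = |flat| = 2 * |cch| = 2 * DS (rev s)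
    have hperm2 : List.Perm (((buildB words).getD s []).filter (fun i => decide (i ∈ used))) flat := by
      rw [List.perm_ext_iff_of_nodup (hgrp_nodup.filter _) hflat_nodup]
      intro x
      rw [List.mem_filter, decide_eq_true_eq]
      constructor
      · rintro ⟨hxg, hxu⟩
        exact (hused_grp x hxg).mp hxu
      · intro hx
        have hxg := hflat_sub x hx
        exact ⟨hxg, (hused_grp x hxg).mpr hx⟩
    have hflatlen : flat.length = 2 * cch.length := by
      rw [hflat, List.length_flatten, List.map_map]
      have := sum_len_two (cch.map (fun pr => pr.2))
        (fun v hv => by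
          obtain ⟨pr, hpr, rfl⟩ := List.mem_map.mp hv
          exact (inv2 pr (List.mem_filter.mp hpr).1).1)
      rw [List.map_map] at this
      simpa using this
    have hcchDS : cch.length = DS words s.toList.reverse := by
      rw [hcch, ← List.countP_eq_length_filter]
      have h1 : ch.countP rel = (ch.map Prod.fst).countP
          (fun t => decide (s.toList <:+ t.toList) && decide (t ≠ s)) := by
        rw [List.countP_map]
        rfl
      rw [h1, inv1, List.countP_filter]
      unfold DS
      rw [List.countP_filter]
      refine count_rev_eq _ _ done (allR words) hdonenodup (nodup_allR words) ?_
      intro t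
      constructor
      · rintro ⟨u, hu, hP, rfl⟩
        simp only [Bool.and_eq_true, decide_eq_true_eq] at hP
        obtain ⟨⟨hpre, hne⟩, hpaired⟩ := hP
        have huL : u ∈ L := hdonesub u hu
        have hukeys : u ∈ (buildB words).keys := ((mem_kfilt words u).mp ((hmemL u).mp huL)).1
        refine ⟨(mem_keys_iff_allR words u).mp hukeys, ?_⟩
        simp only [Bool.and_eq_true, decide_eq_true_eq]
        refine ⟨hpaired, List.reverse_prefix.mpr hpre, ?_⟩
        intro h
        have := congrArg List.reverse h
        simp only [List.reverse_reverse] at this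
        exact hne (String.toList_inj.mp this)
      · rintro ⟨htA, hQ⟩
        simp only [Bool.and_eq_true, decide_eq_true_eq] at hQ
        obtain ⟨hpaired, hpre, hne⟩ := hQ
        set u := String.ofList t.reverse with hu
        have hrev : u.toList.reverse = t := sigma_props t
        have huK : u ∈ kfilt (buildB words) := paired_mem_kfilt words t htA hpaired
        have huL : u ∈ L := (hmemL u).mpr huK
        have hlen : s.toList.length < u.toList.length := by
          have h2 := strict_prefix_length hpre hne
          have h3 : u.toList.length = t.length := by
            rw [hu, String.toList_ofList, List.length_reverse]
          simp only [List.length_reverse] at h2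
          omega
        have hudone : u ∈ done := hlonger_done u huL hlen
        refine ⟨u, hudone, ?_, hrev⟩
        simp only [Bool.and_eq_true, decide_eq_true_eq]
        refine ⟨⟨?_, ?_⟩, ?_⟩
        · rw [← hrev] at hpre
          exact List.reverse_prefix.mp hpre
        · intro h
          rw [h] at hrev
          exact hne hrev.symm
        · unfold pairedS
          rw [hrev]
          exact hpaired
    have hsplitlen : (((buildB words).getD s []).filter (fun i => !decide (i ∈ used))).length
        + 2 * DS words s.toList.reverse = cntR words s.toList.reverse := by
      have h0 := (List.filter_append_perm (fun i => decide (i ∈ used))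
        ((buildB words).getD s [])).length_eq
      rw [List.length_append] at h0
      have h1 := hperm2.length_eq
      rw [hflatlen, hcchDS] at h1
      rw [← grp_len words s hsne]
      omega
    -- the step
    have hfilter_eq : ((buildB words).getD s []).filter (fun i => !used.contains i)
        = ((buildB words).getD s []).filter (fun i => !decide (i ∈ used)) := by
      refine List.filter_congr (fun x _ => ?_)
      simp [List.contains_iff_mem]
    have havail : PySem.List.slice (((buildB words).getD s []).filter
        (fun i => !used.contains i)) none (some 2)
        = (((buildB words).getD s []).filter (fun i => !decide (i ∈ used))).take 2 := by
      rw [hfilter_eq, PySem.List.slice_to _ (by norm_num)]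
      rfl
    have hpairedS_iff : pairedS words s = true
        ↔ 2 ≤ (((buildB words).getD s []).filter (fun i => !decide (i ∈ used))).length := by
      unfold pairedS
      rw [pairedR_def, decide_eq_true_eq]
      omega
    rw [List.foldl_cons]
    by_cases hp : pairedS words s = true
    · have hlen2 : 2 ≤ (((buildB words).getD s []).filter (fun i => !decide (i ∈ used))).length :=
        hpairedS_iff.mp hp
      set avail := (((buildB words).getD s []).filter (fun i => !decide (i ∈ used))).take 2
        with havaildef
      have havlen : avail.length = 2 := by
        rw [havaildef, List.length_take]
        omega
      have hstep : stepB (buildB words) (used, cnt) s = (PySem.Set.update used avail, cnt + 2) := by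
        unfold stepB
        simp only [havail]
        rw [if_pos (by simp [havlen])]
      rw [hstep]
      have hih := ih (done ++ [s]) (ch ++ [(s, avail)]) (PySem.Set.update used avail) (cnt + 2)
        (by rw [hL, List.append_assoc]; rfl)
        ?_
      · rw [hih, List.countP_cons]
        simp only [hp, if_pos]
        push_cast
        ring
      · refine ⟨?_, ?_, ?_, ?_⟩
        · rw [List.map_append, inv1, List.filter_append]
          simp [hp]
        · intro pr hpr
          rcases List.mem_append.mp hpr with h | h
          · exact inv2 pr h
          · rcases List.mem_singleton.mp h with rfl
            refine ⟨havlen, ?_, ?_⟩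
            · exact (hgrp_nodup.filter _).sublist (List.take_sublist _ _)
            · intro x hx
              have := List.mem_of_mem_take hx
              exact List.mem_of_mem_filter this
        · rw [List.pairwise_append]
          refine ⟨inv3, List.pairwise_singleton _ _, ?_⟩
          intro a ha b hb x hxa
          rcases List.mem_singleton.mp hb with rfl
          intro hxb
          have hxused : x ∈ used := (inv4 x).mpr ⟨a, ha, hxa⟩
          have := List.mem_of_mem_take hxb
          rw [List.mem_filter] at this
          simp only [Bool.not_eq_eq_eq_not, Bool.not_true, decide_eq_false_iff_not] at this
          exact this.2 hxused
        · intro x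
          rw [mem_update_iff, inv4]
          constructor
          · rintro (⟨pr, hpr, hx⟩ | hx)
            · exact ⟨pr, List.mem_append_left _ hpr, hx⟩
            · exact ⟨(s, avail), List.mem_append_right _ (List.mem_singleton.mpr rfl), hx⟩
          · rintro ⟨pr, hpr, hx⟩
            rcases List.mem_append.mp hpr with h | h
            · exact Or.inl ⟨pr, h, hx⟩
            · rcases List.mem_singleton.mp h with rfl
              exact Or.inr hx
    · have hlen2 : ¬ 2 ≤ (((buildB words).getD s []).filter (fun i => !decide (i ∈ used))).length :=
        fun h => hp (hpairedS_iff.mpr h)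
      have hstep : stepB (buildB words) (used, cnt) s = (used, cnt) := by
        unfold stepB
        simp only [havail]
        rw [if_neg (by
          simp only [beq_iff_eq, List.length_take]
          omega)]
      rw [hstep]
      have hih := ih (done ++ [s]) ch used cnt
        (by rw [hL, List.append_assoc]; rfl)
        ⟨by rw [List.filter_append, inv1]; simp [hp], inv2, inv3, inv4⟩
      rw [hih, List.countP_cons]
      simp [hp]

lemma greedy_main (words : List String) :
    ((PySem.List.sorted (kfilt (buildB words)) PySem.Str.len true).foldl
      (stepB (buildB words)) ((PySem.Set.empty : PySem.Set Int), (0 : Int))).2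
      = 2 * (((PySem.List.sorted (kfilt (buildB words)) PySem.Str.len true).countP
          (pairedS words) : Nat) : Int) := by
  have h := greedy_go words (PySem.List.sorted (kfilt (buildB words)) PySem.Str.len true)
    [] [] PySem.Set.empty 0 (by simp)
    ⟨by simp, by simp, by simp, by simp [PySem.Set.empty]⟩
  rw [h]
  ring

-- the sorted key list and allR count the same paired suffixes
lemma count_L_eq_allR (words : List String) :
    (PySem.List.sorted (kfilt (buildB words)) PySem.Str.len true).countP (pairedS words)
      = (allR words).countP (pairedR words) := by
  have hperm : List.Perm (PySem.List.sorted (kfilt (buildB words)) PySem.Str.len true)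
      (kfilt (buildB words)) := PySem.List.sorted_perm _ _ _
  rw [List.Perm.countP_eq _ hperm]
  refine count_rev_eq _ _ (kfilt (buildB words)) (allR words)
    ((nodup_keys_buildB words).filter _) (nodup_allR words) ?_
  intro t
  constructor
  · rintro ⟨u, hu, hP, rfl⟩
    exact ⟨(mem_keys_iff_allR words u).mp ((mem_kfilt words u).mp hu).1, hP⟩
  · rintro ⟨htA, hQ⟩
    exact ⟨String.ofList t.reverse, paired_mem_kfilt words t htA hQ,
      by unfold pairedS; rw [sigma_props]; exact hQ, sigma_props t⟩

-- ---------- B-side: the trie recursion computes the same pairing count ----------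

def tailsAt (words : List String) (r : List Char) : List String :=
  ((RW words).filter (fun l => decide (r <+: l))).map (fun l => String.ofList (l.drop r.length))

lemma pvDecomp_ofList_nil : pvDecomp (String.ofList []) = none := by
  unfold pvDecomp
  rw [String.toList_ofList]

lemma pvDecomp_ofList_cons (c : Char) (cs : List Char) :
    pvDecomp (String.ofList (c :: cs)) = some (c, String.ofList cs) := by
  unfold pvDecomp
  rw [String.toList_ofList]

lemma singleton_prefix_cons (c c' : Char) (cs : List Char) :
    [c] <+: c' :: cs ↔ c = c' := by
  constructor
  · rintro ⟨m, hm⟩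
    simp only [List.cons_append, List.nil_append] at hm
    exact (List.cons.injEq _ _ _ _ ▸ hm).1
  · rintro rfl
    exact ⟨cs, rfl⟩

lemma bucket_tailsAt (words : List String) (r : List Char) (c : Char) :
    (pvBuckets (tailsAt words r)).getD c [] = tailsAt words (r ++ [c]) := by
  rw [getD_pvBuckets]
  unfold tailsAt
  induction (RW words) with
  | nil => simp
  | cons l L ih =>
    by_cases hr : r <+: l
    · have h1 : List.filter (fun x => decide (r <+: x)) (l :: L)
          = l :: List.filter (fun x => decide (r <+: x)) L :=
        List.filter_cons_of_pos (decide_eq_true hr)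
      rw [h1, List.map_cons]
      obtain ⟨m, hm⟩ := hr
      have hdrop : l.drop r.length = m := by rw [← hm, List.drop_left]
      rw [hdrop]
      cases m with
      | nil =>
        rw [List.filterMap_cons, pvDecomp_ofList_nil]
        have hnot : ¬ (r ++ [c] <+: l) := by
          rw [← hm]
          simp only [List.append_nil]
          intro hcon
          have := hcon.length_le
          simp at this
        have h2 : List.filter (fun x => decide ((r ++ [c]) <+: x)) (l :: L)
            = List.filter (fun x => decide ((r ++ [c]) <+: x)) L :=
          List.filter_cons_of_neg (by simpa using hnot)
        rw [h2]
        exact ih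
      | cons c' cs =>
        rw [List.filterMap_cons, pvDecomp_ofList_cons]
        by_cases hc : c' = c
        · subst hc
          have hpre : r ++ [c'] <+: l := by
            rw [← hm]
            exact ⟨cs, by simp⟩
          have h2 : List.filter (fun x => decide ((r ++ [c']) <+: x)) (l :: L)
              = l :: List.filter (fun x => decide ((r ++ [c']) <+: x)) L :=
            List.filter_cons_of_pos (decide_eq_true hpre)
          rw [h2, List.map_cons]
          have h3 : List.filter (fun p => p.1 == c') ((c', String.ofList cs)
              :: List.filterMap pvDecomp ((List.filter (fun x => decide (r <+: x)) L).map
                (fun l => String.ofList (l.drop r.length))))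
              = (c', String.ofList cs) :: List.filter (fun p => p.1 == c')
                (List.filterMap pvDecomp ((List.filter (fun x => decide (r <+: x)) L).map
                  (fun l => String.ofList (l.drop r.length)))) :=
            List.filter_cons_of_pos (by simp)
          rw [h3, List.map_cons]
          refine congrArg₂ List.cons ?_ ?_
          · rw [← hm]
            have hsplit : r ++ c' :: cs = (r ++ [c']) ++ cs := by simp
            rw [hsplit, List.drop_left]
          · simpa using ih
        · have hnot : ¬ (r ++ [c] <+: l) := by
            rw [← hm]
            intro hcon
            rw [List.prefix_append_right_inj] at hcon
            exact hc ((singleton_prefix_cons c c' cs).mp hcon).symm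
          have h2 : List.filter (fun x => decide ((r ++ [c]) <+: x)) (l :: L)
              = List.filter (fun x => decide ((r ++ [c]) <+: x)) L :=
            List.filter_cons_of_neg (by simpa using hnot)
          have h3 : List.filter (fun p => p.1 == c) ((c', String.ofList cs)
              :: List.filterMap pvDecomp ((List.filter (fun x => decide (r <+: x)) L).map
                (fun l => String.ofList (l.drop r.length))))
              = List.filter (fun p => p.1 == c)
                (List.filterMap pvDecomp ((List.filter (fun x => decide (r <+: x)) L).map
                  (fun l => String.ofList (l.drop r.length)))) :=
            List.filter_cons_of_neg (by simp [hc])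
          rw [h2, h3]
          simpa using ih
    · have hnot : ¬ (r ++ [c] <+: l) := by
        intro hcon
        exact hr ((List.prefix_append r [c]).trans hcon)
      have h1 : List.filter (fun x => decide (r <+: x)) (l :: L)
          = List.filter (fun x => decide (r <+: x)) L :=
        List.filter_cons_of_neg (by simpa using hr)
      have h2 : List.filter (fun x => decide ((r ++ [c]) <+: x)) (l :: L)
          = List.filter (fun x => decide ((r ++ [c]) <+: x)) L :=
        List.filter_cons_of_neg (by simpa using hnot)
      rw [h1, h2]
      exact ih

lemma mem_keys_bucket (words : List String) (r : List Char) (c : Char) :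
    c ∈ (pvBuckets (tailsAt words r)).keys ↔ ∃ l ∈ RW words, (r ++ [c]) <+: l := by
  constructor
  · intro h
    have hne := getD_ne_nil_of_mem_keys _ _ h
    rw [bucket_tailsAt] at hne
    unfold tailsAt at hne
    rw [Ne, List.map_eq_nil_iff, List.filter_eq_nil_iff] at hne
    push_neg at hne
    obtain ⟨l, hl, hpre⟩ := hne
    rw [decide_eq_true_eq] at hpre
    exact ⟨l, hl, hpre⟩
  · intro ⟨l, hl, hpre⟩
    by_contra hnk
    have hcc : ¬ (pvBuckets (tailsAt words r)).contains c = true :=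
      fun hcc => hnk ((PySem.Dict.contains_iff_mem_keys _ _).mp hcc)
    have : (pvBuckets (tailsAt words r)).getD c [] = [] :=
      PySem.Dict.getD_of_not_contains _ _ (by simpa using hcc)
    rw [bucket_tailsAt] at this
    unfold tailsAt at this
    rw [List.map_eq_nil_iff, List.filter_eq_nil_iff] at this
    exact this l hl (by simpa using hpre)

lemma count_empty_tailsAt (words : List String) (r : List Char) :
    List.count "" (tailsAt words r) = (RW words).countP (fun l => decide (l = r)) := by
  unfold tailsAt
  rw [List.count_eq_countP, List.countP_map, List.countP_filter]
  refine List.countP_congr (fun l _ => ?_)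
  simp only [Function.comp_apply, beq_iff_eq, Bool.and_eq_true, decide_eq_true_eq]
  constructor
  · rintro ⟨he, hpre⟩
    have := congrArg String.toList he
    rw [String.toList_ofList] at this
    simp only [String.toList_empty] at this
    obtain ⟨m, hm⟩ := hpre
    rw [← hm, List.drop_left] at this
    rw [← hm, this, List.append_nil]
  · rintro rfl
    refine ⟨?_, List.prefix_refl _⟩
    rw [List.drop_length]

lemma countP_disjoint_add {α : Type} (L : List α) (p q : α → Bool)
    (h : ∀ x ∈ L, ¬(p x = true ∧ q x = true)) :
    L.countP (fun x => p x || q x) = L.countP p + L.countP q := by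
  induction L with
  | nil => simp
  | cons x L ih =>
    rw [List.countP_cons, List.countP_cons, List.countP_cons,
      ih (fun y hy => h y (List.mem_cons_of_mem _ hy))]
    by_cases hp : p x = true
    · have hq : ¬ q x = true := fun hq => h x List.mem_cons_self ⟨hp, hq⟩
      simp only [Bool.not_eq_true] at hq
      simp [hp, hq]
      ring
    · simp only [Bool.not_eq_true] at hp
      by_cases hq : q x = true
      · simp [hp, hq]; ring
      · simp only [Bool.not_eq_true] at hq
        simp [hp, hq]

lemma sum_countP_of_disjoint {κ α : Type} (K : List κ) (hK : K.Nodup)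
    (q : κ → α → Bool) (L : List α)
    (hdisj : ∀ t : α, ∀ c ∈ K, ∀ c' ∈ K, q c t = true → q c' t = true → c = c') :
    (K.map (fun c => L.countP (q c))).sum = L.countP (fun t => K.any (fun c => q c t)) := by
  induction K with
  | nil => simp
  | cons c0 K ih
  =>
    rcases List.nodup_cons.mp hK with ⟨hc0, hK'⟩
    rw [List.map_cons, List.sum_cons,
      ih hK' (fun t c hc c' hc' h1 h2 =>
        hdisj t c (List.mem_cons_of_mem _ hc) c' (List.mem_cons_of_mem _ hc') h1 h2)]
    have : L.countP (fun t => (c0 :: K).any (fun c => q c t))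
        = L.countP (fun t => q c0 t || K.any (fun c => q c t)) := by
      refine List.countP_congr (fun t _ => ?_)
      simp [List.any_cons]
    rw [this, countP_disjoint_add L (q c0) (fun t => K.any (fun c => q c t)) ?_]
    · intro t ht
      rintro ⟨h1, h2⟩
      rw [List.any_eq_true] at h2
      obtain ⟨c', hc', h2'⟩ := h2
      exact hc0 ((hdisj t c0 List.mem_cons_self c' (List.mem_cons_of_mem _ hc') h1 h2') ▸ hc')

lemma ext_disjoint (r : List Char) (c c' : Char) (l : List Char)
    (h1 : r ++ [c] <+: l) (h2 : r ++ [c'] <+: l) : c = c' := by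
  rcases List.prefix_or_prefix_of_prefix h1 h2 with h | h
  · have := h.eq_of_length (by simp)
    simpa using this
  · have := h.eq_of_length (by simp)
    simpa using this.symm

lemma cnt_split (words : List String) (r : List Char) (K : List Char) (hK : K.Nodup)
    (hcov : ∀ c, c ∈ K ↔ ∃ l ∈ RW words, (r ++ [c]) <+: l) :
    cntR words r = (RW words).countP (fun l => decide (l = r))
      + (K.map (fun c => cntR words (r ++ [c]))).sum := by
  have hsum := sum_countP_of_disjoint K hK
    (fun c l => decide ((r ++ [c]) <+: l)) (RW words)
    (fun l c _ c' _ h1 h2 => ext_disjoint r c c' l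
      (decide_eq_true_eq.mp h1) (decide_eq_true_eq.mp h2))
  unfold cntR
  rw [hsum]
  rw [← countP_disjoint_add (RW words) (fun l => decide (l = r))
    (fun l => K.any (fun c => decide ((r ++ [c]) <+: l))) ?_]
  · refine List.countP_congr (fun l hl => ?_)
    simp only [Bool.or_eq_true, decide_eq_true_eq, List.any_eq_true]
    constructor
    · intro hpre
      by_cases he : l = r
      · exact Or.inl he
      · refine Or.inr ?_
        obtain ⟨m, hm⟩ := hpre
        cases m with
        | nil =>
          exfalso
          apply he
          rw [← hm, List.append_nil]
        | cons c cs =>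
          have hext : r ++ [c] <+: l := by rw [← hm]; exact ⟨cs, by simp⟩
          exact ⟨c, (hcov c).mpr ⟨l, hl, hext⟩, hext⟩
    · rintro (rfl | ⟨c, hc, hpre⟩)
      · exact List.prefix_refl _
      · exact (List.prefix_append r [c]).trans hpre
  · intro l hl
    rintro ⟨h1, h2⟩
    rw [decide_eq_true_eq] at h1
    rw [List.any_eq_true] at h2
    obtain ⟨c, hc, h2'⟩ := h2
    rw [decide_eq_true_eq] at h2'
    subst h1
    have := h2'.length_le
    simp at this

lemma DS_split (words : List String) (r : List Char) (K : List Char) (hK : K.Nodup)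
    (hcov : ∀ c, c ∈ K ↔ ∃ l ∈ RW words, (r ++ [c]) <+: l) :
    DS words r = (K.map (fun c => NS words (r ++ [c]))).sum := by
  have hNS : ∀ c, NS words (r ++ [c])
      = (allR words).countP (fun t => pairedR words t && decide ((r ++ [c]) <+: t)) := by
    intro c
    unfold NS
    rw [List.countP_filter]
  have hDS : DS words r
      = (allR words).countP (fun t => pairedR words t
          && (decide (r <+: t) && decide (t ≠ r))) := by
    unfold DS
    rw [List.countP_filter]
  have hsum := sum_countP_of_disjoint K hK
    (fun c t => pairedR words t && decide ((r ++ [c]) <+: t)) (allR words)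
    (fun t c _ c' _ h1 h2 => by
      rw [Bool.and_eq_true, decide_eq_true_eq] at h1 h2
      exact ext_disjoint r c c' t h1.2 h2.2)
  rw [hDS]
  have heq : (K.map (fun c => NS words (r ++ [c])))
      = (K.map (fun c => (allR words).countP
          (fun t => pairedR words t && decide ((r ++ [c]) <+: t)))) :=
    List.map_congr_left (fun c _ => hNS c)
  rw [heq, hsum]
  refine List.countP_congr (fun t htA => ?_)
  simp only [List.any_eq_true, Bool.and_eq_true, decide_eq_true_eq]
  constructor
  · rintro ⟨hpaired, hpre, hne⟩
    obtain ⟨m, hm⟩ := hpre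
    cases m with
    | nil =>
      exfalso
      apply hne
      rw [← hm, List.append_nil]
    | cons c cs =>
      obtain ⟨-, l, hl, hpre2⟩ := (mem_allR words t).mp htA
      have hext : r ++ [c] <+: t := by rw [← hm]; exact ⟨cs, by simp⟩
      exact ⟨c, (hcov c).mpr ⟨l, hl, hext.trans hpre2⟩, hpaired, hext⟩
  · rintro ⟨c, hc, hpaired, hpre⟩
    refine ⟨hpaired, (List.prefix_append r [c]).trans hpre, ?_⟩
    intro h
    subst h
    have := hpre.length_le
    simp at this

lemma sum_map_sub_int (K : List Char) (f g : Char → Int) :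
    (K.map (fun c => f c - g c)).sum = (K.map f).sum - (K.map g).sum := by
  induction K with
  | nil => simp
  | cons c K ih => simp [ih]; ring

lemma sum_int_cast (K : List Char) (f : Char → Nat) :
    (((K.map f).sum : Nat) : Int) = (K.map (fun c => ((f c : Nat) : Int))).sum := by
  induction K with
  | nil => simp
  | cons c K ih => simp [ih]

lemma fold_core (words : List String) (r : List Char)
    (hrec : ∀ c ∈ (pvBuckets (tailsAt words r)).keys,
      solveB (tailsAt words (r ++ [c])) false
        = (2 * (NS words (r ++ [c]) : Int),
           (cntR words (r ++ [c]) : Int) - 2 * (NS words (r ++ [c]) : Int))) :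
    (pvBuckets (tailsAt words r)).values.attach.foldl
      (fun (pu : Int × Int) b =>
        let q := solveB b.1 false
        (pu.1 + q.1, pu.2 + q.2))
      ((0 : Int), (PySem.List.count (tailsAt words r) "" : Int))
      = (2 * (DS words r : Int), (cntR words r : Int) - 2 * (DS words r : Int)) := by
  have hattach : (pvBuckets (tailsAt words r)).values.attach.foldl
      (fun (pu : Int × Int) b =>
        let q := solveB b.1 false
        (pu.1 + q.1, pu.2 + q.2))
      ((0 : Int), (PySem.List.count (tailsAt words r) "" : Int))
      = (pvBuckets (tailsAt words r)).values.foldl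
        (fun (pu : Int × Int) v =>
          let q := solveB v false
          (pu.1 + q.1, pu.2 + q.2))
        ((0 : Int), (PySem.List.count (tailsAt words r) "" : Int)) :=
    List.foldl_attach (l := (pvBuckets (tailsAt words r)).values)
      (f := fun (pu : Int × Int) v =>
        let q := solveB v false
        (pu.1 + q.1, pu.2 + q.2))
      (b := ((0 : Int), (PySem.List.count (tailsAt words r) "" : Int)))
  rw [hattach, PySem.Dict.values_eq_map_keys _ (keys_pvBuckets_nodup _) [], List.foldl_map]
  rw [PySem.List.foldl_congr_mem _ _
    (fun (pu : Int × Int) c =>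
      (pu.1 + 2 * (NS words (r ++ [c]) : Int),
       pu.2 + ((cntR words (r ++ [c]) : Int) - 2 * (NS words (r ++ [c]) : Int)))) _
    (fun pu c hc => by
      show (let q := solveB ((pvBuckets (tailsAt words r)).getD c []) false
        (pu.1 + q.1, pu.2 + q.2)) = _
      rw [bucket_tailsAt, hrec c hc])]
  rw [PySem.List.foldl_prod_mk (fun (a : Int) c => a + 2 * (NS words (r ++ [c]) : Int))
    (fun (b : Int) c => b + ((cntR words (r ++ [c]) : Int) - 2 * (NS words (r ++ [c]) : Int)))]
  rw [PySem.List.foldl_add, PySem.List.foldl_add]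
  have hK := keys_pvBuckets_nodup (tailsAt words r)
  have hcov := mem_keys_bucket words r
  have hcnt := cnt_split words r _ hK hcov
  have hDS := DS_split words r _ hK hcov
  have hcount : (PySem.List.count (tailsAt words r) "" : Int)
      = ((RW words).countP (fun l => decide (l = r)) : Int) := by
    rw [PySem.List.count_eq, count_empty_tailsAt]
  refine congrArg₂ Prod.mk ?_ ?_
  · rw [show ((pvBuckets (tailsAt words r)).keys.map
        (fun c => 2 * (NS words (r ++ [c]) : Int))).sum
      = 2 * ((pvBuckets (tailsAt words r)).keys.map
        (fun c => (NS words (r ++ [c]) : Int))).sum from List.sum_map_mul_left _ _ _]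
    rw [show ((pvBuckets (tailsAt words r)).keys.map
        (fun c => (NS words (r ++ [c]) : Int))).sum = (DS words r : Int) by
      rw [hDS, sum_int_cast]]
    ring
  · rw [show ((pvBuckets (tailsAt words r)).keys.map
        (fun c => (cntR words (r ++ [c]) : Int) - 2 * (NS words (r ++ [c]) : Int))).sum
      = ((pvBuckets (tailsAt words r)).keys.map
          (fun c => (cntR words (r ++ [c]) : Int))).sum
        - 2 * ((pvBuckets (tailsAt words r)).keys.map
          (fun c => (NS words (r ++ [c]) : Int))).sum from by
      rw [← List.sum_map_mul_left, ← sum_map_sub_int]]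
    rw [show ((pvBuckets (tailsAt words r)).keys.map
        (fun c => (NS words (r ++ [c]) : Int))).sum = (DS words r : Int) by
      rw [hDS, sum_int_cast]]
    rw [hcount]
    rw [show ((pvBuckets (tailsAt words r)).keys.map
        (fun c => (cntR words (r ++ [c]) : Int))).sum
      = ((((pvBuckets (tailsAt words r)).keys.map
          (fun c => cntR words (r ++ [c]))).sum : Nat) : Int) from (sum_int_cast _ _).symm]
    have : ((cntR words r : Nat) : Int)
        = ((RW words).countP (fun l => decide (l = r)) : Int)
          + ((((pvBuckets (tailsAt words r)).keys.map
            (fun c => cntR words (r ++ [c]))).sum : Nat) : Int) := by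
      rw [hcnt]; push_cast; ring
    omega

lemma cntR_zero_of_long (words : List String) (r : List Char)
    (h : maxW words + 1 ≤ r.length) : cntR words r = 0 := by
  unfold cntR
  rw [List.countP_eq_zero]
  intro l hl
  simp only [decide_eq_true_eq]
  intro hpre
  have h1 := hpre.length_le
  have h2 := length_le_maxW words l hl
  omega

lemma NS_zero_of_long (words : List String) (r : List Char)
    (h : maxW words + 1 ≤ r.length) : NS words r = 0 := by
  unfold NS
  rw [List.countP_eq_zero]
  intro t ht
  intro _
  rw [List.mem_filter] at ht
  simp only [decide_eq_true_eq] at ht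
  have h1 := ht.2.length_le
  have h2 := mem_allR_length words t ht.1
  omega

lemma keys_empty_of_long (words : List String) (r : List Char)
    (h : maxW words + 1 ≤ r.length) : (pvBuckets (tailsAt words r)).keys = [] := by
  by_contra hne
  obtain ⟨c, hc⟩ := List.exists_mem_of_ne_nil _ hne
  obtain ⟨l, hl, hpre⟩ := (mem_keys_bucket words r c).mp hc
  have h1 := hpre.length_le
  have h2 := length_le_maxW words l hl
  simp at h1
  omega

lemma solveB_long (words : List String) (r : List Char)
    (hlong : maxW words + 1 ≤ r.length) :
    solveB (tailsAt words r) false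
      = (2 * (NS words r : Int), (cntR words r : Int) - 2 * (NS words r : Int)) := by
  rw [solveB]
  have hkeys := keys_empty_of_long words r hlong
  have hvals : (pvBuckets (tailsAt words r)).values = [] := by
    have := PySem.Dict.values_eq_map_keys (pvBuckets (tailsAt words r))
      (keys_pvBuckets_nodup _) []
    rw [this, hkeys]
    rfl
  have hcnt0 : cntR words r = 0 := cntR_zero_of_long words r hlong
  have hNS0 : NS words r = 0 := NS_zero_of_long words r hlong
  have hcount0 : PySem.List.count (tailsAt words r) "" = 0 := by
    rw [PySem.List.count_eq, count_empty_tailsAt, List.countP_eq_zero]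
    intro l hl
    simp only [decide_eq_true_eq]
    rintro rfl
    have h2 := length_le_maxW words l hl
    omega
  rw [hvals, hcount0, hcnt0, hNS0]
  norm_num

lemma solveB_node (words : List String) :
    ∀ (n : Nat) (r : List Char), r ≠ [] → maxW words + 1 - r.length ≤ n →
      solveB (tailsAt words r) false
        = (2 * (NS words r : Int), (cntR words r : Int) - 2 * (NS words r : Int)) := by
  intro n
  induction n with
  | zero =>
    intro r hne hmeas
    exact solveB_long words r (by omega)
  | succ n ih =>
    intro r hne hmeas
    by_cases hlong : maxW words + 1 ≤ r.length
    · exact solveB_long words r hlong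
    · have hrlen : r.length ≤ maxW words := by omega
      have hrec : ∀ c ∈ (pvBuckets (tailsAt words r)).keys,
          solveB (tailsAt words (r ++ [c])) false
            = (2 * (NS words (r ++ [c]) : Int),
               (cntR words (r ++ [c]) : Int) - 2 * (NS words (r ++ [c]) : Int)) := by
        intro c hc
        refine ih (r ++ [c]) (by simp) ?_
        rw [List.length_append]
        simp only [List.length_cons, List.length_nil]
        omega
      rw [solveB]
      rw [fold_core words r hrec]
      by_cases hp : pairedR words r = true
      · have h2 : 2 ≤ (cntR words r : Int) - 2 * (DS words r : Int) := by
          rw [pairedR_def, decide_eq_true_eq] at hp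
          exact hp
        have hmem : r ∈ allR words := cntR_pos_mem_allR words r hne
          (by have := pairedR_cntR words r hp; omega)
        have hNS : NS words r = DS words r + 1 := by
          rw [NS_eq_DS words r hne, if_pos ⟨hmem, hp⟩]
        rw [if_pos ⟨rfl, h2⟩, hNS]
        refine congrArg₂ Prod.mk ?_ ?_ <;> push_cast <;> ring
      · have h2 : ¬ (2 ≤ (cntR words r : Int) - 2 * (DS words r : Int)) := by
          rw [pairedR_def] at hp
          simpa using hp
        have hNS : NS words r = DS words r := by
          rw [NS_eq_DS words r hne, if_neg (fun hcon => hp hcon.2)]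
          omega
        rw [if_neg (fun hcon => h2 hcon.2), hNS]

lemma DS_nil (words : List String) :
    DS words [] = (allR words).countP (pairedR words) := by
  unfold DS
  congr 1
  rw [List.filter_eq_self]
  intro t ht
  simp only [Bool.and_eq_true, decide_eq_true_eq]
  exact ⟨List.nil_prefix, ((mem_allR words t).mp ht).1⟩

lemma solveB_root (words : List String) :
    (solveB (tailsAt words []) true).1
      = 2 * (((allR words).countP (pairedR words) : Nat) : Int) := by
  have hrec : ∀ c ∈ (pvBuckets (tailsAt words [])).keys,
      solveB (tailsAt words ([] ++ [c])) false
        = (2 * (NS words ([] ++ [c]) : Int),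
           (cntR words ([] ++ [c]) : Int) - 2 * (NS words ([] ++ [c]) : Int)) := by
    intro c hc
    exact solveB_node words (maxW words + 1) ([] ++ [c]) (by simp) (by omega)
  rw [solveB]
  rw [fold_core words [] hrec]
  rw [if_neg (fun hcon => by simpa using hcon.1)]
  rw [DS_nil]

lemma alt_eq (words : List String) :
    alien_rhyme_alt words = 2 * (((allR words).countP (pairedR words) : Nat) : Int) := by
  unfold alien_rhyme_alt
  have hlist : words.map (fun w => (PySem.Str.slice? w none none (-1)).getD "")
      = tailsAt words [] := by
    unfold tailsAt RW
    rw [List.filter_eq_self.mpr (by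
      intro l hl
      simp only [decide_eq_true_eq]
      exact List.nil_prefix)]
    rw [List.map_map]
    refine List.map_congr_left (fun w _ => ?_)
    simp only [Function.comp_apply, List.drop_zero]
    rw [PySem.Str.slice?_none_none_neg_one]
    rfl
  rw [hlist, solveB_root]

-- ===== VERDICT (by name: the statement is the Claim_ definition above) =====
theorem alien_rhyme_spec : Claim_equal_alien_rhyme := by
  intro words _
  unfold Spec_alien_rhyme
  rw [A_eq_greedy, greedy_main, count_L_eq_allR, alt_eq]
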